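-- pv_equiv track=rewrite | github.com/JayJi5204/OneDayOneAlgo | CHYW/코딩테스트문제/강철부대.py | solution
-- ===== SOURCE A (Python) =====
-- from collections import deque
--
-- def bfs(start,graph,visited):
--     q = deque()
--     q.append((start,0))
--     while q:
--         x,cost = q.popleft()
--
--         for i in graph[x]:
--             if not visited[i]:
--                 visited[i] = cost+1
--                 q.append((i,cost+1))
--
--     return visited
--
-- def solution(n, roads, sources, destination):
--     answer = []
--     graph = [[] for _ in range(n+1)]
--     for road in roads:
--         a,b = road
--         graph[a].append(b)
--         graph[b].append(a)
--
--     visited = [0]*(n+1)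
--     bfs(destination,graph,visited)
--     visited[destination] = 0
--
--     for source in sources:
--         if source == destination:
--             answer.append(0)
--         elif visited[source] == 0:
--             answer.append(-1)
--         else:
--             answer.append(visited[source])
--
--     return answer
-- ===== SOURCE B (Python) =====
-- def solution(n, roads, sources, destination):
--     # Bellman-Ford style relaxation over the edge list: no adjacency list, no queue.
--     dist = [None] * (n + 1)
--     dist[destination] = 0
--     for _ in range(n):
--         changed = False
--         for a, b in roads:
--             if dist[b] is not None and (dist[a] is None or dist[b] + 1 < dist[a]):
--                 dist[a] = dist[b] + 1
--                 changed = True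
--             if dist[a] is not None and (dist[b] is None or dist[a] + 1 < dist[b]):
--                 dist[b] = dist[a] + 1
--                 changed = True
--         if not changed:
--             break
--     return [0 if s == destination else (-1 if dist[s] is None else dist[s])
--             for s in sources]
-- ===== Notes on version B (the rewrite author's own statement) =====
-- stated objective: alternative
-- what changed: Replaced the adjacency-list + deque BFS by Bellman-Ford style edge-list relaxation: no graph is built and no queue is kept; distances (None = unreachable) are repeatedly relaxed over the raw road list until stable.
-- intended difference: When a source denotes the destination cell through Python's negative-index alias (s = destination +/- (n+1)), A returns -1 there (its 0-sentinel conflates 'unvisited' with the destination's distance 0) while B returns 0, the true distance to the destination. — e.g. on solution(1, [], [-1], 1): A returns [-1], B returns [0]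
import Mathlib
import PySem

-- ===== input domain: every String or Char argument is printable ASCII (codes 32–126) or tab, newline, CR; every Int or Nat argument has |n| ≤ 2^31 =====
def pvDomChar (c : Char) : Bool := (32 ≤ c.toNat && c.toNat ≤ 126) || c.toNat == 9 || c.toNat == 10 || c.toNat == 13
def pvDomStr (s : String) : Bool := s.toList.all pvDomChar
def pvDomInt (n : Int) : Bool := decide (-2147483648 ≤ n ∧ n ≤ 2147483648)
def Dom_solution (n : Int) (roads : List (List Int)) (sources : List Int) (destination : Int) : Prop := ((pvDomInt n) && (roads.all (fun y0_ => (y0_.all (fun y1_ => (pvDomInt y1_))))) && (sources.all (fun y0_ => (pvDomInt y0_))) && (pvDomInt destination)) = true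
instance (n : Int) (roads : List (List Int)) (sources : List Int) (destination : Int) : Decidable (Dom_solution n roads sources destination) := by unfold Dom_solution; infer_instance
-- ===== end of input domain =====

-- B replaces A's adjacency-list + deque BFS by Bellman-Ford style relaxation over the raw
-- edge list (no graph is built, no queue kept; None marks unreachable cells), with an
-- early stop once a whole pass changes nothing (objective: alternative).
-- A's loop port carries a fuel argument ((n+1).toNat + 1, provably sufficient: each fuel
-- unit is a queue pop); the fuel-exhausted branch is never reached from the entry point.

-- ===== PORT A =====
-- graph[x] (default only reached outside Pre_, where Python raises IndexError)
def pvNbrs (graph : List (List Int)) (x : Int) : List Int := PySem.List.pyGetD graph x []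

-- 'a, b = road; graph[a].append(b); graph[b].append(a)'; a road of length ≠ 2 raises
-- ValueError in Python (excluded by Pre_), here it is skipped
def pvAddRoad (g : List (List Int)) (road : List Int) : List (List Int) :=
  match road with
  | [a, b] =>
    let g1 := PySem.List.pySetD g a (PySem.List.pyGetD g a [] ++ [b])
    PySem.List.pySetD g1 b (PySem.List.pyGetD g1 b [] ++ [a])
  | _ => g

def pvBuildGraph (n : Int) (roads : List (List Int)) : List (List Int) :=
  roads.foldl pvAddRoad (List.replicate (n + 1).toNat [])

-- one neighbour step of A's bfs: 'if not visited[i]: visited[i] = cost+1; q.append((i, cost+1))'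
-- (out-of-range i reads the default 1 ≠ 0, i.e. no action; Python raises there — outside Pre_)
def pvStepA (cost : Int) (st : List Int × List (Int × Int)) (i : Int) : List Int × List (Int × Int) :=
  if PySem.List.pyGetD st.1 i 1 = 0 then
    (PySem.List.pySetD st.1 i (cost + 1), st.2 ++ [(i, cost + 1)])
  else st

-- A's bfs loop: q is a deque of (node, cost); nodes are marked when enqueued
def pvBfsA (graph : List (List Int)) : Nat → List (Int × Int) → List Int → List Int
  | _, [], visited => visited
  | 0, _, visited => visited
  | fuel + 1, (x, cost) :: rest, visited =>
    let st := (pvNbrs graph x).foldl (pvStepA cost) (visited, [])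
    pvBfsA graph fuel (rest ++ st.2) st.1

def solution (n : Int) (roads : List (List Int)) (sources : List Int) (destination : Int) : List Int :=
  let graph := pvBuildGraph n roads
  let visited := pvBfsA graph ((n + 1).toNat + 1) [(destination, 0)] (List.replicate (n + 1).toNat 0)
  let visited2 := PySem.List.pySetD visited destination 0
  sources.foldl (fun answer source =>
    answer ++ [if source = destination then (0 : Int)
               else if PySem.List.pyGetD visited2 source 0 = 0 then -1
               else PySem.List.pyGetD visited2 source 0]) []

-- ===== PORT B =====
-- 'if dist[b] is not None and (dist[a] is None or dist[b] + 1 < dist[a]):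
--    dist[a] = dist[b] + 1; changed = True'
def pvRelaxAB (st : List (Option Int) × Bool) (a b : Int) : List (Option Int) × Bool :=
  match PySem.List.pyGetD st.1 b none with
  | none => st
  | some db =>
    match PySem.List.pyGetD st.1 a none with
    | none => (PySem.List.pySetD st.1 a (some (db + 1)), true)
    | some da =>
      if db + 1 < da then (PySem.List.pySetD st.1 a (some (db + 1)), true) else st

-- one road: both directions, the second reading the already-updated array (as in Python);
-- a road of length ≠ 2 raises ValueError in Python (excluded by Pre_), here it is skipped
def pvRelaxRoad (st : List (Option Int) × Bool) (road : List Int) : List (Option Int) × Bool :=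
  match road with
  | [a, b] => pvRelaxAB (pvRelaxAB st a b) b a
  | _ => st

-- 'for _ in range(n): changed = False; …; if not changed: break'
def pvRounds (roads : List (List Int)) : Nat → List (Option Int) → List (Option Int)
  | 0, dist => dist
  | k + 1, dist =>
    let st := roads.foldl pvRelaxRoad (dist, false)
    if st.2 then pvRounds roads k st.1 else st.1

def solution_alt (n : Int) (roads : List (List Int)) (sources : List Int) (destination : Int) : List Int :=
  let dist0 := PySem.List.pySetD (List.replicate (n + 1).toNat (none : Option Int)) destination (some 0)
  let dist := pvRounds roads n.toNat dist0
  sources.map (fun s =>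
    if s = destination then (0 : Int)
    else match PySem.List.pyGetD dist s none with
         | none => -1
         | some w => w)

-- ===== PRECONDITION & SPEC =====
-- Pre_ = exactly the inputs on which Python A returns: n ≥ 0, every road a pair, and every
-- index (road endpoints, sources, destination) within Python's list-index range -(n+1)..n
-- (negative in-range indices wrap identically in A and B and are kept inside Pre_)
def Pre_solution (n : Int) (roads : List (List Int)) (sources : List Int) (destination : Int) : Prop :=
  0 ≤ n ∧ (-(n + 1) ≤ destination ∧ destination ≤ n) ∧
  (∀ r ∈ roads, r.length = 2 ∧ ∀ x ∈ r, -(n + 1) ≤ x ∧ x ≤ n) ∧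
  (∀ s ∈ sources, -(n + 1) ≤ s ∧ s ≤ n)
instance (n : Int) (roads : List (List Int)) (sources : List Int) (destination : Int) : Decidable (Pre_solution n roads sources destination) := by unfold Pre_solution; infer_instance

def pvWitness_solution : Int × List (List Int) × List Int × Int := (3, [[0, 1], [1, 2]], [0, 2, 3], 2)

-- When a source denotes the destination cell through Python's negative-index alias
-- (s = destination ± (n+1)), A returns -1 there (its 0-sentinel conflates 'unvisited' with
-- the destination's distance 0) while B returns 0, the true distance to the destination.
def D_solution (n : Int) (roads : List (List Int)) (sources : List Int) (destination : Int) : Prop :=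
  ∃ s ∈ sources, s = destination - (n + 1) ∨ s = destination + (n + 1)
instance (n : Int) (roads : List (List Int)) (sources : List Int) (destination : Int) : Decidable (D_solution n roads sources destination) := by unfold D_solution; infer_instance

def Spec_solution (n : Int) (roads : List (List Int)) (sources : List Int) (destination : Int) (out : List Int) : Prop := ¬ D_solution n roads sources destination → out = solution_alt n roads sources destination
instance (n : Int) (roads : List (List Int)) (sources : List Int) (destination : Int) (out : List Int) : Decidable (Spec_solution n roads sources destination out) := by unfold Spec_solution; infer_instance

def pvDiffWitness_solution : Int × List (List Int) × List Int × Int := (1, [], [-1], 1)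
def pvDiffWitnessOut_solution : (List Int) × (List Int) := ([-1], [0])

-- ===== CLAIM (what is proved, stated in full; the proofs are below) =====
def Claim_unchanged_solution : Prop := ∀ (n : Int) (roads : List (List Int)) (sources : List Int) (destination : Int), Dom_solution n roads sources destination → Pre_solution n roads sources destination → Spec_solution n roads sources destination (solution n roads sources destination)
def Claim_changed_solution : Prop := Dom_solution (pvDiffWitness_solution.1) (pvDiffWitness_solution.2.1) (pvDiffWitness_solution.2.2.1) (pvDiffWitness_solution.2.2.2) ∧ Pre_solution (pvDiffWitness_solution.1) (pvDiffWitness_solution.2.1) (pvDiffWitness_solution.2.2.1) (pvDiffWitness_solution.2.2.2) ∧ D_solution (pvDiffWitness_solution.1) (pvDiffWitness_solution.2.1) (pvDiffWitness_solution.2.2.1) (pvDiffWitness_solution.2.2.2) ∧ solution (pvDiffWitness_solution.1) (pvDiffWitness_solution.2.1) (pvDiffWitness_solution.2.2.1) (pvDiffWitness_solution.2.2.2) = pvDiffWitnessOut_solution.1 ∧ solution_alt (pvDiffWitness_solution.1) (pvDiffWitness_solution.2.1) (pvDiffWitness_solution.2.2.1) (pvDiffWitness_solution.2.2.2) = pvDiffWitnessOut_solution.2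 ∧ pvDiffWitnessOut_solution.1 ≠ pvDiffWitnessOut_solution.2
def Claim_exact_solution : Prop := ∀ (n : Int) (roads : List (List Int)) (sources : List Int) (destination : Int), Dom_solution n roads sources destination → Pre_solution n roads sources destination → D_solution n roads sources destination → solution n roads sources destination ≠ solution_alt n roads sources destination

-- ===== LEMMAS AND PROOFS =====
-- ---- basic cells and index bridges ----

def pvN (n : Int) : Nat := (n + 1).toNat

def pvCell (n x : Int) : Nat := if 0 ≤ x then x.toNat else (x + (n + 1)).toNat

def pvInR (n x : Int) : Prop := -(n + 1) ≤ x ∧ x ≤ n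

theorem pvCell_lt {n x : Int} (hn : 0 ≤ n) (hx : pvInR n x) : pvCell n x < pvN n := by
  unfold pvCell pvN pvInR at *; split_ifs <;> omega

theorem pvCell_inj {n x y : Int} (hn : 0 ≤ n) (hx : pvInR n x) (hy : pvInR n y)
    (h : pvCell n x = pvCell n y) : x = y ∨ x = y - (n + 1) ∨ x = y + (n + 1) := by
  unfold pvCell pvInR at *; split_ifs at h <;> omega

theorem pvCell_alias {n x y : Int} (hn : 0 ≤ n) (hx : pvInR n x) (hy : pvInR n y)
    (h : x = y - (n + 1) ∨ x = y + (n + 1)) : pvCell n x = pvCell n y := by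
  unfold pvCell pvInR at *; split_ifs <;> omega

theorem pv_pyGetD_cell {α : Type} {n x : Int} (v : List α) (d : α)
    (hn : 0 ≤ n) (hx : pvInR n x) (hlen : v.length = pvN n) :
    ∃ hc : pvCell n x < v.length, PySem.List.pyGetD v x d = v[pvCell n x] := by
  have hc : pvCell n x < v.length := by rw [hlen]; exact pvCell_lt hn hx
  refine ⟨hc, ?_⟩
  simp only [PySem.List.pyGetD, PySem.List.pyGet?, PySem.List.pyIdx?]
  unfold pvCell pvInR pvN at *
  by_cases h0 : 0 ≤ x
  · rw [if_pos h0, if_pos (by omega : x < (v.length : Int))]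
    simp only [Option.bind]
    rw [List.getElem?_eq_getElem (by simpa [h0] using hc)]
    simp [h0]
  · rw [if_neg h0, if_pos (by omega : -(v.length : Int) ≤ x)]
    simp only [Option.bind]
    have hEq : v.length - (-x).toNat = (x + (n + 1)).toNat := by omega
    rw [hEq, if_neg h0] at *
    rw [List.getElem?_eq_getElem hc]
    simp [if_neg h0]

theorem pv_pySetD_cell {α : Type} {n x : Int} (v : List α) (w : α)
    (hn : 0 ≤ n) (hx : pvInR n x) (hlen : v.length = pvN n) :
    PySem.List.pySetD v x w = v.set (pvCell n x) w := by
  simp only [PySem.List.pySetD, PySem.List.pySet?, PySem.List.pyIdx?]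
  unfold pvCell pvInR pvN at *
  by_cases h0 : 0 ≤ x
  · rw [if_pos h0, if_pos (by omega : x < (v.length : Int))]
    simp [h0]
  · rw [if_neg h0, if_pos (by omega : -(v.length : Int) ≤ x)]
    simp only [Option.map_some, Option.getD_some]
    congr 1
    rw [if_neg h0]
    omega

-- getD/set helpers on Nat indices
theorem pv_getD_set_self {α : Type} (l : List α) (i : Nat) (v d : α) (h : i < l.length) :
    (l.set i v).getD i d = v := by
  simp [List.getD_eq_getElem?_getD, List.getElem?_set_self, h]

theorem pv_getD_set_ne {α : Type} (l : List α) (i j : Nat) (v d : α) (h : j ≠ i) :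
    (l.set i v).getD j d = l.getD j d := by
  simp [List.getD_eq_getElem?_getD, List.getElem?_set_ne (by omega : i ≠ j)]

-- ---- the edge relation of the road list, walks and exact distances ----

def pvE (n : Int) (roads : List (List Int)) (j k : Nat) : Prop :=
  ∃ a b, [a, b] ∈ roads ∧ ((pvCell n a = j ∧ pvCell n b = k) ∨ (pvCell n a = k ∧ pvCell n b = j))

def pvGood (n : Int) (roads : List (List Int)) : Prop :=
  ∀ r ∈ roads, r.length = 2 ∧ ∀ x ∈ r, pvInR n x

theorem pvE_symm {n : Int} {roads : List (List Int)} {j k : Nat} (h : pvE n roads j k) :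
    pvE n roads k j := by
  obtain ⟨a, b, hm, hor⟩ := h
  exact ⟨a, b, hm, hor.symm⟩

theorem pvE_lt {n : Int} {roads : List (List Int)} {j k : Nat} (hn : 0 ≤ n)
    (hg : pvGood n roads) (h : pvE n roads j k) : j < pvN n ∧ k < pvN n := by
  obtain ⟨a, b, hm, hor⟩ := h
  have ha := (hg _ hm).2 a (by simp)
  have hb := (hg _ hm).2 b (by simp)
  have := pvCell_lt hn ha
  have := pvCell_lt hn hb
  rcases hor with ⟨h1, h2⟩ | ⟨h1, h2⟩ <;> omega

def pvReach (n : Int) (roads : List (List Int)) (destination : Int) : Nat → Nat → Prop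
  | 0, j => j = pvCell n destination
  | d + 1, j => ∃ x, pvReach n roads destination d x ∧ pvE n roads x j

def pvMinD (n : Int) (roads : List (List Int)) (destination : Int) (d : Nat) (j : Nat) : Prop :=
  pvReach n roads destination d j ∧ ∀ e < d, ¬ pvReach n roads destination e j

theorem pvReach_lt {n : Int} {roads : List (List Int)} {destination : Int} (hn : 0 ≤ n)
    (hg : pvGood n roads) (hd : pvInR n destination) :
    ∀ d j, pvReach n roads destination d j → j < pvN n := by
  intro d
  induction d with
  | zero => intro j h; rw [pvReach] at h; subst h; exact pvCell_lt hn hd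
  | succ d ih =>
    intro j h
    rw [pvReach] at h
    obtain ⟨x, _, hE⟩ := h
    exact (pvE_lt hn hg hE).2

theorem pvMinD_unique {n : Int} {roads : List (List Int)} {destination : Int} {d e j : Nat}
    (h1 : pvMinD n roads destination d j) (h2 : pvMinD n roads destination e j) : d = e := by
  rcases h1 with ⟨r1, m1⟩
  rcases h2 with ⟨r2, m2⟩
  rcases Nat.lt_trichotomy d e with h | h | h
  · exact absurd r1 (m2 d h)
  · exact h
  · exact absurd r2 (m1 e h)

theorem pvReach_minD {n : Int} {roads : List (List Int)} {destination : Int} :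
    ∀ d j, pvReach n roads destination d j → ∃ e ≤ d, pvMinD n roads destination e j := by
  intro d
  induction d using Nat.strong_induction_on with
  | _ d ih =>
    intro j h
    by_cases hlow : ∃ e < d, pvReach n roads destination e j
    · obtain ⟨e, he, hr⟩ := hlow
      obtain ⟨e', he', hm⟩ := ih e he j hr
      exact ⟨e', by omega, hm⟩
    · exact ⟨d, le_refl d, h, fun e he hr => hlow ⟨e, he, hr⟩⟩

theorem pvMinD_le_of_reach {n : Int} {roads : List (List Int)} {destination : Int} {d e j : Nat}
    (h1 : pvMinD n roads destination d j) (h2 : pvReach n roads destination e j) : d ≤ e := by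
  by_contra h
  exact h1.2 e (by omega) h2

theorem pvMinD_zero_iff {n : Int} {roads : List (List Int)} {destination : Int} {j : Nat} :
    pvMinD n roads destination 0 j ↔ j = pvCell n destination := by
  constructor
  · intro h; exact h.1
  · intro h; exact ⟨h, by omega⟩

theorem pvMinD_succ_pred {n : Int} {roads : List (List Int)} {destination : Int} {d j : Nat}
    (h : pvMinD n roads destination (d + 1) j) :
    ∃ x, pvMinD n roads destination d x ∧ pvE n roads x j := by
  obtain ⟨r, m⟩ := h
  rw [pvReach] at r
  obtain ⟨x, hx, hE⟩ := r
  obtain ⟨e, he, hm⟩ := pvReach_minD d x hx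
  rcases Nat.lt_or_ge e d with hlt | hge
  · exfalso
    have : pvReach n roads destination (e + 1) j := ⟨x, hm.1, hE⟩
    exact m (e + 1) (by omega) this
  · have : e = d := by omega
    subst this
    exact ⟨x, hm, hE⟩

theorem pvMinD_exists_le {n : Int} {roads : List (List Int)} {destination : Int} :
    ∀ d j, pvMinD n roads destination d j → ∀ e ≤ d, ∃ x, pvMinD n roads destination e x := by
  intro d
  induction d with
  | zero =>
    intro j h e he
    obtain rfl : e = 0 := by omega
    exact ⟨j, h⟩
  | succ d ih =>
    intro j h e he
    rcases Nat.eq_or_lt_of_le he with heq | hlt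
    · exact ⟨j, heq ▸ h⟩
    · obtain ⟨x, hm, _⟩ := pvMinD_succ_pred h
      exact ih x hm e (by omega)

theorem pvMinD_lt_N {n : Int} {roads : List (List Int)} {destination : Int} {d j : Nat}
    (hn : 0 ≤ n) (hg : pvGood n roads) (hd : pvInR n destination)
    (h : pvMinD n roads destination d j) : d < pvN n := by
  have hex : ∀ e : Fin (d + 1), ∃ x, pvMinD n roads destination e x := by
    intro e
    exact pvMinD_exists_le d j h e (by omega)
  classical
  let f : Fin (d + 1) → Fin (pvN n) := fun e =>
    ⟨Classical.choose (hex e), by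
      have hm := Classical.choose_spec (hex e)
      exact pvReach_lt hn hg hd _ _ hm.1⟩
  have hinj : Function.Injective f := by
    intro e1 e2 hf
    have h1 := Classical.choose_spec (hex e1)
    have h2 := Classical.choose_spec (hex e2)
    have : Classical.choose (hex e1) = Classical.choose (hex e2) := congrArg Fin.val hf
    rw [this] at h1
    exact Fin.ext (pvMinD_unique h1 h2)
  have := Fintype.card_le_of_injective f hinj
  simp at this
  omega

theorem pvMinD_empty_succ {n : Int} {roads : List (List Int)} {destination : Int} {d : Nat}
    (h : ∀ j, ¬ pvMinD n roads destination d j) :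
    ∀ e j, d ≤ e → ¬ pvMinD n roads destination e j := by
  intro e
  induction e with
  | zero =>
    intro j he
    obtain rfl : d = 0 := by omega
    exact h j
  | succ e ih =>
    intro j he hm
    rcases Nat.eq_or_lt_of_le he with heq | hlt
    · exact h j (heq ▸ hm)
    · obtain ⟨x, hx, _⟩ := pvMinD_succ_pred hm
      exact ih x (by omega) hx

theorem pvE_dest {n : Int} {roads : List (List Int)} {destination : Int} {j : Nat}
    (hE : pvE n roads (pvCell n destination) j) (hne : j ≠ pvCell n destination) :
    pvMinD n roads destination 1 j := by
  have hr : pvReach n roads destination 1 j := ⟨pvCell n destination, rfl, hE⟩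
  obtain ⟨e, he, hm⟩ := pvReach_minD 1 j hr
  interval_cases e
  · exact absurd (pvMinD_zero_iff.mp hm) hne
  · exact hm

-- ---- the adjacency list built by A, characterized road-wise ----

theorem pv_pyGetD_cellD {α : Type} {n x : Int} (v : List α) (d : α)
    (hn : 0 ≤ n) (hx : pvInR n x) (hlen : v.length = pvN n) :
    PySem.List.pyGetD v x d = v.getD (pvCell n x) d := by
  obtain ⟨hc, h⟩ := pv_pyGetD_cell v d hn hx hlen
  rw [h, List.getD_eq_getElem v d hc]

theorem pvAddRoad_length (g : List (List Int)) (r : List Int) :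
    (pvAddRoad g r).length = g.length := by
  unfold pvAddRoad
  match r with
  | [] => rfl
  | [a] => rfl
  | [a, b] => simp [PySem.List.length_pySetD]
  | a :: b :: c :: t => rfl

theorem pvBuild_fold_length : ∀ (rs : List (List Int)) (g : List (List Int)),
    (rs.foldl pvAddRoad g).length = g.length := by
  intro rs
  induction rs with
  | nil => intro g; rfl
  | cons r t ih => intro g; rw [List.foldl_cons, ih, pvAddRoad_length]

theorem pvBuildGraph_length (n : Int) (roads : List (List Int)) :
    (pvBuildGraph n roads).length = pvN n := by
  unfold pvBuildGraph pvN
  rw [pvBuild_fold_length]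
  simp

theorem pvAddRoad_mem {n a b : Int} (g : List (List Int)) (hn : 0 ≤ n)
    (ha : pvInR n a) (hb : pvInR n b) (hlen : g.length = pvN n) :
    ∀ j, j < pvN n → ∀ i,
      (i ∈ (pvAddRoad g [a, b]).getD j [] ↔
        i ∈ g.getD j [] ∨ (pvCell n a = j ∧ i = b) ∨ (pvCell n b = j ∧ i = a)) := by
  intro j hj i
  have hca := pvCell_lt hn ha
  have hcb := pvCell_lt hn hb
  unfold pvAddRoad
  simp only
  rw [pv_pyGetD_cellD g _ hn ha hlen, pv_pySetD_cell g _ hn ha hlen]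
  set g1 := g.set (pvCell n a) (g.getD (pvCell n a) [] ++ [b]) with hg1
  have hlen1 : g1.length = pvN n := by simp [hg1, hlen]
  rw [pv_pyGetD_cellD g1 _ hn hb hlen1, pv_pySetD_cell g1 _ hn hb hlen1]
  have hga : g1.getD (pvCell n a) [] = g.getD (pvCell n a) [] ++ [b] :=
    pv_getD_set_self g _ _ _ (by rw [hlen]; exact hca)
  have hgo : ∀ k, k ≠ pvCell n a → g1.getD k [] = g.getD k [] := by
    intro k hk
    exact pv_getD_set_ne g _ _ _ _ hk
  by_cases hjb : j = pvCell n b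
  · subst hjb
    rw [pv_getD_set_self g1 _ _ _ (by rw [hlen1]; exact hcb)]
    by_cases hba : pvCell n b = pvCell n a
    · rw [hba, hga]
      simp only [List.mem_append, List.mem_singleton]
      tauto
    · rw [hgo _ hba]
      simp only [List.mem_append, List.mem_singleton]
      have : ¬ pvCell n a = pvCell n b := fun h => hba h.symm
      tauto
  · rw [pv_getD_set_ne g1 _ _ _ _ hjb]
    by_cases hja : j = pvCell n a
    · subst hja
      rw [hga]
      simp only [List.mem_append, List.mem_singleton]
      have : ¬ pvCell n b = pvCell n a := fun h => hjb h.symm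
      tauto
    · rw [hgo _ hja]
      have h1 : ¬ pvCell n a = j := fun h => hja h.symm
      have h2 : ¬ pvCell n b = j := fun h => hjb h.symm
      tauto

theorem pvBuild_fold_mem {n : Int} (hn : 0 ≤ n) :
    ∀ (rs : List (List Int)) (g : List (List Int)), g.length = pvN n →
      (∀ r ∈ rs, r.length = 2 ∧ ∀ x ∈ r, pvInR n x) →
      ∀ j, j < pvN n → ∀ i,
        (i ∈ (rs.foldl pvAddRoad g).getD j [] ↔
          i ∈ g.getD j [] ∨ ∃ a b, [a, b] ∈ rs ∧
            ((pvCell n a = j ∧ b = i) ∨ (pvCell n b = j ∧ a = i))) := by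
  intro rs
  induction rs with
  | nil => intro g hlen _ j hj i; simp
  | cons r t ih =>
    intro g hlen hgood j hj i
    have hr := hgood r (by simp)
    obtain ⟨a, b, rfl⟩ := List.length_eq_two.mp hr.1
    have ha := hr.2 a (by simp)
    have hb := hr.2 b (by simp)
    rw [List.foldl_cons]
    rw [ih (pvAddRoad g [a, b]) (by rw [pvAddRoad_length]; exact hlen)
      (fun r hm => hgood r (by simp [hm])) j hj i]
    rw [pvAddRoad_mem g hn ha hb hlen j hj i]
    constructor
    · rintro ((hg | h1 | h2) | ⟨a', b', hm, hor⟩)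
      · exact Or.inl hg
      · exact Or.inr ⟨a, b, by simp, Or.inl ⟨h1.1, h1.2.symm⟩⟩
      · exact Or.inr ⟨a, b, by simp, Or.inr ⟨h2.1, h2.2.symm⟩⟩
      · exact Or.inr ⟨a', b', by simp [hm], hor⟩
    · rintro (hg | ⟨a', b', hm, hor⟩)
      · exact Or.inl (Or.inl hg)
      · rcases List.mem_cons.mp hm with heq | hm'
        · have h1 : a' = a ∧ b' = b := by simpa using heq
          rcases hor with ⟨hc, he⟩ | ⟨hc, he⟩
          · exact Or.inl (Or.inr (Or.inl ⟨h1.1 ▸ hc, h1.2 ▸ he.symm⟩))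
          · exact Or.inl (Or.inr (Or.inr ⟨h1.2 ▸ hc, h1.1 ▸ he.symm⟩))
        · exact Or.inr ⟨a', b', hm', hor⟩

theorem pvBuildGraph_mem {n : Int} {roads : List (List Int)} (hn : 0 ≤ n)
    (hgood : pvGood n roads) :
    ∀ j, j < pvN n → ∀ i,
      (i ∈ (pvBuildGraph n roads).getD j [] ↔ ∃ a b, [a, b] ∈ roads ∧
        ((pvCell n a = j ∧ b = i) ∨ (pvCell n b = j ∧ a = i))) := by
  intro j hj i
  unfold pvBuildGraph
  rw [pvBuild_fold_mem hn roads _ (by simp [pvN]) hgood j hj i]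
  have hrep : (List.replicate ((n + 1).toNat) ([] : List Int)).getD j [] = [] := by
    simp [List.getD_eq_getElem?_getD, List.getElem?_replicate]
    split_ifs <;> rfl
  rw [hrep]
  simp

-- neighbours seen from a cell: in range, and exactly the pvE-neighbours
theorem pvNbrs_mem_E {n : Int} {roads : List (List Int)} (hn : 0 ≤ n)
    (hgood : pvGood n roads) {j : Nat} (hj : j < pvN n) {i : Int}
    (hi : i ∈ (pvBuildGraph n roads).getD j []) :
    pvInR n i ∧ pvE n roads j (pvCell n i) := by
  rw [pvBuildGraph_mem hn hgood j hj i] at hi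
  obtain ⟨a, b, hm, hor⟩ := hi
  have ha := (hgood _ hm).2 a (by simp)
  have hb := (hgood _ hm).2 b (by simp)
  rcases hor with ⟨hc, he⟩ | ⟨hc, he⟩
  · subst he; exact ⟨hb, a, b, hm, Or.inl ⟨hc, rfl⟩⟩
  · subst he; exact ⟨ha, a, b, hm, Or.inr ⟨rfl, hc⟩⟩

theorem pvE_nbr {n : Int} {roads : List (List Int)} (hn : 0 ≤ n)
    (hgood : pvGood n roads) {j k : Nat} (hj : j < pvN n) (hE : pvE n roads j k) :
    ∃ i, i ∈ (pvBuildGraph n roads).getD j [] ∧ pvCell n i = k := by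
  obtain ⟨a, b, hm, hor⟩ := hE
  rcases hor with ⟨hc1, hc2⟩ | ⟨hc1, hc2⟩
  · exact ⟨b, (pvBuildGraph_mem hn hgood j hj b).mpr ⟨a, b, hm, Or.inl ⟨hc1, rfl⟩⟩, hc2⟩
  · exact ⟨a, (pvBuildGraph_mem hn hgood j hj a).mpr ⟨a, b, hm, Or.inr ⟨hc2, rfl⟩⟩, hc1⟩

-- ---- proof-side level-synchronized view of A's deque BFS ----
-- (pvLevel is not part of either port: it is the intermediate description through which
-- A's queue BFS is related to the exact-distance predicate pvMinD)

def pvStepB (m : Int) (st : List Int × List Int) (i : Int) : List Int × List Int :=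
  if PySem.List.pyGetD st.1 i 1 = 0 then (PySem.List.pySetD st.1 i m, st.2 ++ [i]) else st

def pvExpand (graph : List (List Int)) (m : Int) (st : List Int × List Int) (x : Int) :
    List Int × List Int :=
  (pvNbrs graph x).foldl (pvStepB m) st

def pvLevel (graph : List (List Int)) : Nat → List Int → Int → List Int → List Int
  | _, [], _, dist => dist
  | 0, _, _, dist => dist
  | fuel + 1, x :: rest, d, dist =>
    let st := (x :: rest).foldl (pvExpand graph (d + 1)) (dist, [])
    pvLevel graph fuel st.2 (d + 1) st.1

-- marking an unvisited cell removes one 0 from the distance array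
theorem pv_count_set_zero (v : List Int) (k : Nat) (m : Int) (hk : v[k]? = some 0) (hm : m ≠ 0) :
    (v.set k m).count 0 + 1 = v.count 0 := by
  induction v generalizing k with
  | nil => simp at hk
  | cons a t ih =>
    cases k with
    | zero =>
      simp only [List.getElem?_cons_zero, Option.some.injEq] at hk
      subst hk
      simp [hm]
    | succ k =>
      simp only [List.getElem?_cons_succ] at hk
      rw [List.set_cons_succ]
      simp only [List.count_cons]
      have := ih k hk
      omega

theorem pv_getD_zero {v : List Int} {k : Nat} (h : (v[k]?).getD (1 : Int) = 0) :
    v[k]? = some 0 := by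
  cases hvk : v[k]? with
  | none => rw [hvk] at h; simp at h
  | some a => rw [hvk] at h; simp only [Option.getD_some] at h; rw [h]

theorem pv_count_pySetD (v : List Int) (i m : Int)
    (h : PySem.List.pyGetD v i 1 = 0) (hm : m ≠ 0) :
    (PySem.List.pySetD v i m).count 0 + 1 = v.count 0 := by
  simp only [PySem.List.pyGetD, PySem.List.pyGet?, PySem.List.pySetD, PySem.List.pySet?,
    PySem.List.pyIdx?] at h ⊢
  split_ifs at h ⊢ with h1 h2 h3
  · exact pv_count_set_zero v i.toNat m (pv_getD_zero h) hm
  · simp at h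
  · exact pv_count_set_zero v (v.length - (-i).toNat) m (pv_getD_zero h) hm
  · simp at h

-- B's inner fold preserves (#zeros of dist) + (#appended nodes)
theorem pv_countB (m : Int) (hm : m ≠ 0) (nbrs : List Int) :
    ∀ (v : List Int) (acc : List Int),
      (nbrs.foldl (pvStepB m) (v, acc)).1.count 0 +
        (nbrs.foldl (pvStepB m) (v, acc)).2.length = v.count 0 + acc.length := by
  induction nbrs with
  | nil => intro v acc; simp
  | cons i t ih =>
    intro v acc
    simp only [List.foldl_cons, pvStepB]
    split_ifs with h
    · rw [ih]
      have := pv_count_pySetD v i m h hm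
      simp; omega
    · exact ih v acc

theorem pv_countB_frontier (graph : List (List Int)) (m : Int) (hm : m ≠ 0) (l : List Int) :
    ∀ (v : List Int) (acc : List Int),
      (l.foldl (pvExpand graph m) (v, acc)).1.count 0 +
        (l.foldl (pvExpand graph m) (v, acc)).2.length = v.count 0 + acc.length := by
  induction l with
  | nil => intro v acc; simp
  | cons x t ih =>
    intro v acc
    simp only [List.foldl_cons, pvExpand]
    have h1 := pv_countB m hm (pvNbrs graph x) v acc
    rcases hst : (pvNbrs graph x).foldl (pvStepB m) (v, acc) with ⟨v', acc'⟩
    rw [hst] at h1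
    rw [ih v' acc']
    simpa using h1

-- B's inner fold only appends to its accumulator
theorem pv_stepB_shift (m : Int) (nbrs : List Int) :
    ∀ (v : List Int) (acc : List Int),
      nbrs.foldl (pvStepB m) (v, acc) =
        ((nbrs.foldl (pvStepB m) (v, [])).1, acc ++ (nbrs.foldl (pvStepB m) (v, [])).2) := by
  induction nbrs with
  | nil => intro v acc; simp
  | cons i t ih =>
    intro v acc
    simp only [List.foldl_cons, pvStepB]
    split_ifs with h
    · rw [ih _ (acc ++ [i]), ih _ ([] ++ [i])]; simp
    · exact ih v acc

theorem pv_expand_shift (graph : List (List Int)) (m : Int) (l : List Int) :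
    ∀ (v : List Int) (acc : List Int),
      l.foldl (pvExpand graph m) (v, acc) =
        ((l.foldl (pvExpand graph m) (v, [])).1, acc ++ (l.foldl (pvExpand graph m) (v, [])).2) := by
  induction l with
  | nil => intro v acc; simp
  | cons x t ih =>
    intro v acc
    simp only [List.foldl_cons, pvExpand]
    rw [pv_stepB_shift m (pvNbrs graph x) v acc, pv_stepB_shift m (pvNbrs graph x) v []]
    rw [ih _ (acc ++ _), ih _ ([] ++ _)]
    simp

-- A's inner fold is the marking fold with each appended node paired with its cost
theorem pv_stepAB (cost : Int) (nbrs : List Int) :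
    ∀ (v : List Int) (accB : List Int),
      nbrs.foldl (pvStepA cost) (v, accB.map (fun i => (i, cost + 1))) =
        ((nbrs.foldl (pvStepB (cost + 1)) (v, accB)).1,
         (nbrs.foldl (pvStepB (cost + 1)) (v, accB)).2.map (fun i => (i, cost + 1))) := by
  induction nbrs with
  | nil => intro v accB; simp
  | cons i t ih =>
    intro v accB
    simp only [List.foldl_cons, pvStepA, pvStepB]
    split_ifs with h
    · have := ih (PySem.List.pySetD v i (cost + 1)) (accB ++ [i])
      simpa using this
    · exact ih v accB

-- processing one whole cost level of A's queue (one fuel unit per pop) equals one frontier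
-- expansion of the level view
theorem pv_level_step (graph : List (List Int)) (d : Int) (l1 : List Int) :
    ∀ (l2 : List Int) (v : List Int) (k : Nat),
      pvBfsA graph (l1.length + k) (l1.map (fun x => (x, d)) ++ l2.map (fun x => (x, d + 1))) v =
        pvBfsA graph k ((l2 ++ (l1.foldl (pvExpand graph (d + 1)) (v, [])).2).map
            (fun x => (x, d + 1)))
          (l1.foldl (pvExpand graph (d + 1)) (v, [])).1 := by
  induction l1 with
  | nil => intro l2 v k; simp
  | cons x t ih =>
    intro l2 v k
    rw [List.map_cons, List.cons_append,
      show (x :: t).length + k = (t.length + k) + 1 by simp; omega, pvBfsA]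
    have hx := pv_stepAB d (pvNbrs graph x) v []
    simp only [List.map_nil] at hx
    rw [hx]
    have hq : t.map (fun x => (x, d)) ++ l2.map (fun x => (x, d + 1)) ++
        ((pvNbrs graph x).foldl (pvStepB (d + 1)) (v, [])).2.map (fun x => (x, d + 1)) =
        t.map (fun x => (x, d)) ++
        (l2 ++ ((pvNbrs graph x).foldl (pvStepB (d + 1)) (v, [])).2).map (fun x => (x, d + 1)) := by
      simp
    rw [hq, ih]
    have hfold : t.foldl (pvExpand graph (d + 1))
        (pvExpand graph (d + 1) (v, []) x) =
        ((t.foldl (pvExpand graph (d + 1))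
            (((pvNbrs graph x).foldl (pvStepB (d + 1)) (v, [])).1, [])).1,
         ((pvNbrs graph x).foldl (pvStepB (d + 1)) (v, [])).2 ++
           (t.foldl (pvExpand graph (d + 1))
             (((pvNbrs graph x).foldl (pvStepB (d + 1)) (v, [])).1, [])).2) := by
      rw [show pvExpand graph (d + 1) (v, []) x =
          (((pvNbrs graph x).foldl (pvStepB (d + 1)) (v, [])).1,
           ((pvNbrs graph x).foldl (pvStepB (d + 1)) (v, [])).2) from by simp [pvExpand]]
      exact pv_expand_shift graph (d + 1) t _ _
    rw [List.foldl_cons, hfold]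
    simp

-- A's queue BFS, started on one whole level with sufficient fuel, equals the level loop
theorem pv_bfs_eq_level (graph : List (List Int)) :
    ∀ (c : Nat) (v : List Int), v.count 0 = c →
      ∀ (l : List Int) (d : Int) (fuelA fuelB : Nat), 0 ≤ d →
        v.count 0 + l.length ≤ fuelA → v.count 0 + 1 ≤ fuelB →
        pvBfsA graph fuelA (l.map (fun x => (x, d))) v = pvLevel graph fuelB l d v := by
  intro c
  induction c using Nat.strong_induction_on with
  | _ c ih =>
    intro v hc l d fuelA fuelB hd hfA hfB
    match l with
    | [] =>
      cases fuelA <;> cases fuelB <;> simp [pvBfsA, pvLevel]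
    | x :: rest =>
      have hmark : d + 1 ≠ 0 := by omega
      have hcount := pv_countB_frontier graph (d + 1) hmark (x :: rest) v []
      simp only [List.length_nil, Nat.add_zero] at hcount
      obtain ⟨fB, rfl⟩ : ∃ fB, fuelB = fB + 1 := ⟨fuelB - 1, by omega⟩
      rw [pvLevel]
      obtain ⟨kA, hkA⟩ : ∃ kA, fuelA = (x :: rest).length + kA :=
        ⟨fuelA - (x :: rest).length, by omega⟩
      rw [hkA, show List.map (fun x => (x, d)) (x :: rest) =
          List.map (fun x => (x, d)) (x :: rest) ++ List.map (fun x => (x, d + 1)) ([] : List Int)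
          from by simp,
        pv_level_step graph d (x :: rest) [] v kA]
      simp only [List.nil_append]
      rcases hst : (x :: rest).foldl (pvExpand graph (d + 1)) (v, []) with ⟨v', nxt⟩
      rw [hst] at hcount
      simp only at hcount ⊢
      match hn : nxt with
      | [] =>
        cases kA <;> cases fB <;> simp [pvBfsA, pvLevel]
      | y :: ys =>
        subst hn
        have hlt : v'.count 0 < c := by simp at hcount; omega
        exact ih (v'.count 0) hlt v' rfl (y :: ys) (d + 1) kA fB (by omega)
          (by simp at hcount ⊢; omega) (by omega)

-- ---- set-level description of one frontier expansion ----

def pvHasCell (n : Int) (l : List Int) (j : Nat) : Prop :=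
  ∃ i ∈ l, pvInR n i ∧ pvCell n i = j

theorem pvHasCell_append {n : Int} {l1 l2 : List Int} {j : Nat} :
    pvHasCell n (l1 ++ l2) j ↔ pvHasCell n l1 j ∨ pvHasCell n l2 j := by
  unfold pvHasCell
  constructor
  · rintro ⟨i, hm, h⟩
    rcases List.mem_append.mp hm with h1 | h2
    · exact Or.inl ⟨i, h1, h⟩
    · exact Or.inr ⟨i, h2, h⟩
  · rintro (⟨i, hm, h⟩ | ⟨i, hm, h⟩)
    · exact ⟨i, List.mem_append.mpr (Or.inl hm), h⟩
    · exact ⟨i, List.mem_append.mpr (Or.inr hm), h⟩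

theorem pv_getD_irrel {α : Type} (v : List α) (j : Nat) (a b : α) (h : j < v.length) :
    v.getD j a = v.getD j b := by
  rw [List.getD_eq_getElem v a h, List.getD_eq_getElem v b h]

-- one neighbour list folded with pvStepB, described cell-wise
theorem pv_inner_mark {n m : Int} (hn : 0 ≤ n) (hm : m ≠ 0) (nbrs : List Int)
    (hnb : ∀ i ∈ nbrs, pvInR n i) :
    ∀ v acc, v.length = pvN n →
      ((nbrs.foldl (pvStepB m) (v, acc)).1.length = pvN n) ∧
      (∀ j, j < pvN n → (nbrs.foldl (pvStepB m) (v, acc)).1.getD j 0 =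
         if v.getD j 0 = 0 ∧ (∃ i ∈ nbrs, pvCell n i = j) then m else v.getD j 0) ∧
      (∀ j, pvHasCell n (nbrs.foldl (pvStepB m) (v, acc)).2 j ↔
         pvHasCell n acc j ∨ (v.getD j 0 = 0 ∧ ∃ i ∈ nbrs, pvInR n i ∧ pvCell n i = j)) := by
  induction nbrs with
  | nil =>
    intro v acc hlen
    refine ⟨hlen, fun j hj => ?_, fun j => ?_⟩ <;> simp
  | cons i t ih =>
    intro v acc hlen
    have hi := hnb i (by simp)
    have hci := pvCell_lt hn hi
    have hci' : pvCell n i < v.length := by rw [hlen]; exact hci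
    have hbr : PySem.List.pyGetD v i 1 = v.getD (pvCell n i) 0 := by
      rw [pv_pyGetD_cellD v 1 hn hi hlen]
      exact pv_getD_irrel v _ 1 0 hci'
    have hstep : pvStepB m (v, acc) i =
        if v.getD (pvCell n i) 0 = 0 then (v.set (pvCell n i) m, acc ++ [i]) else (v, acc) := by
      unfold pvStepB
      simp only [hbr]
      split_ifs with h
      · rw [pv_pySetD_cell v m hn hi hlen]
      · rfl
    rw [List.foldl_cons]
    by_cases hc : v.getD (pvCell n i) 0 = 0
    · have hc' : v[pvCell n i]?.getD (0 : Int) = 0 := by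
        rwa [List.getD_eq_getElem?_getD] at hc
      rw [hstep, if_pos hc]
      obtain ⟨ihl, ih2, ih3⟩ := ih (fun x hx => hnb x (by simp [hx]))
        (v.set (pvCell n i) m) (acc ++ [i]) (by simp [hlen])
      refine ⟨ihl, fun j hj => ?_, fun j => ?_⟩
      · rw [ih2 j hj]
        by_cases hji : j = pvCell n i
        · subst hji
          rw [pv_getD_set_self v _ _ _ hci']
          simp [hm, hc, hc']
        · rw [pv_getD_set_ne v _ _ _ _ hji]
          by_cases h0 : v.getD j 0 = 0 <;> by_cases ht : ∃ x ∈ t, pvCell n x = j <;>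
            simp [h0, ht, hji] <;> tauto
      · rw [ih3 j, pvHasCell_append]
        have hsing : pvHasCell n [i] j ↔ pvCell n i = j := by
          unfold pvHasCell
          constructor
          · rintro ⟨i', hm', _, hcc⟩
            simp at hm'
            subst hm'
            exact hcc
          · intro h
            exact ⟨i, by simp, hi, h⟩
        rw [hsing]
        by_cases hji : j = pvCell n i
        · subst hji
          rw [pv_getD_set_self v _ _ _ hci']
          simp [hm, hc, hc']
          tauto
        · rw [pv_getD_set_ne v _ _ _ _ hji]
          constructor
          · rintro ((h | h) | ⟨h0, x, hx, hxr, hxc⟩)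
            · tauto
            · exact absurd h.symm hji
            · exact Or.inr ⟨h0, x, by simp [hx], hxr, hxc⟩
          · rintro (h | ⟨h0, x, hx, hxr, hxc⟩)
            · tauto
            · rcases List.mem_cons.mp hx with rfl | hx'
              · exact Or.inl (Or.inr hxc)
              · exact Or.inr ⟨h0, x, hx', hxr, hxc⟩
    · have hc2 : ¬ v[pvCell n i]?.getD (0 : Int) = 0 := by
        rwa [List.getD_eq_getElem?_getD] at hc
      rw [hstep, if_neg hc]
      obtain ⟨ihl, ih2, ih3⟩ := ih (fun x hx => hnb x (by simp [hx])) v acc hlen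
      refine ⟨ihl, fun j hj => ?_, fun j => ?_⟩
      · rw [ih2 j hj]
        by_cases hji : j = pvCell n i
        · subst hji
          simp [hc, hc2]
        · by_cases h0 : v.getD j 0 = 0 <;> by_cases ht : ∃ x ∈ t, pvCell n x = j <;>
            simp [h0, ht, hji] <;> tauto
      · rw [ih3 j]
        constructor
        · rintro (h | ⟨h0, x, hx, hxr, hxc⟩)
          · tauto
          · exact Or.inr ⟨h0, x, by simp [hx], hxr, hxc⟩
        · rintro (h | ⟨h0, x, hx, hxr, hxc⟩)
          · tauto
          · rcases List.mem_cons.mp hx with rfl | hx'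
            · subst hxc
              exact absurd h0 hc
            · exact Or.inr ⟨h0, x, hx', hxr, hxc⟩

-- which cells the whole frontier F can newly reach
def pvNbrF (n : Int) (g : List (List Int)) (F : List Int) (j : Nat) : Prop :=
  ∃ x ∈ F, ∃ i ∈ g.getD (pvCell n x) [], pvCell n i = j

theorem pv_outer_mark {n m : Int} (g : List (List Int)) (hn : 0 ≤ n) (hm : m ≠ 0)
    (hglen : g.length = pvN n) (hgnb : ∀ j, j < pvN n → ∀ i ∈ g.getD j [], pvInR n i) :
    ∀ F v acc, v.length = pvN n → (∀ x ∈ F, pvInR n x) →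
      ((F.foldl (pvExpand g m) (v, acc)).1.length = pvN n) ∧
      (∀ j, j < pvN n →
        ((v.getD j 0 = 0 ∧ pvNbrF n g F j) → (F.foldl (pvExpand g m) (v, acc)).1.getD j 0 = m) ∧
        (¬ (v.getD j 0 = 0 ∧ pvNbrF n g F j) →
          (F.foldl (pvExpand g m) (v, acc)).1.getD j 0 = v.getD j 0)) ∧
      (∀ j, pvHasCell n (F.foldl (pvExpand g m) (v, acc)).2 j ↔
         pvHasCell n acc j ∨ (v.getD j 0 = 0 ∧ pvNbrF n g F j)) := by
  intro F
  induction F with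
  | nil =>
    intro v acc hlen _
    refine ⟨hlen, fun j hj => ⟨fun h => ?_, fun h => ?_⟩, fun j => ?_⟩ <;>
      simp [pvNbrF] at * <;> tauto
  | cons x t ih =>
    intro v acc hlen hFr
    have hx := hFr x (by simp)
    have hcx := pvCell_lt hn hx
    rw [List.foldl_cons]
    have hnbrs : pvNbrs g x = g.getD (pvCell n x) [] := pv_pyGetD_cellD g [] hn hx hglen
    have hnbr_r : ∀ i ∈ pvNbrs g x, pvInR n i := by
      rw [hnbrs]; exact hgnb _ hcx
    have hexp : pvExpand g m (v, acc) x = (pvNbrs g x).foldl (pvStepB m) (v, acc) := rfl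
    obtain ⟨il, i2, i3⟩ := pv_inner_mark hn hm (pvNbrs g x) hnbr_r v acc hlen
    rw [hexp]
    rcases hst : (pvNbrs g x).foldl (pvStepB m) (v, acc) with ⟨v1, acc1⟩
    rw [hst] at il i2 i3
    obtain ⟨ol, o2, o3⟩ := ih v1 acc1 il (fun y hy => hFr y (by simp [hy]))
    have hsplit : ∀ j, pvNbrF n g (x :: t) j ↔
        (∃ i ∈ pvNbrs g x, pvCell n i = j) ∨ pvNbrF n g t j := by
      intro j
      unfold pvNbrF
      rw [hnbrs]
      constructor
      · rintro ⟨y, hy, hrest⟩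
        rcases List.mem_cons.mp hy with rfl | hy'
        · exact Or.inl hrest
        · exact Or.inr ⟨y, hy', hrest⟩
      · rintro (h | ⟨y, hy, hrest⟩)
        · exact ⟨x, by simp, h⟩
        · exact ⟨y, by simp [hy], hrest⟩
    refine ⟨ol, fun j hj => ?_, fun j => ?_⟩
    · have hv1 := i2 j hj
      by_cases h0 : v.getD j 0 = 0
      · by_cases hA : ∃ i ∈ pvNbrs g x, pvCell n i = j
        · have hv1m : v1.getD j 0 = m := by rw [hv1, if_pos ⟨h0, hA⟩]
          constructor
          · intro _
            have := (o2 j hj).2 (by rw [hv1m]; rintro ⟨he, _⟩; exact hm he)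
            rw [this, hv1m]
          · intro hneg
            exact absurd ⟨h0, (hsplit j).mpr (Or.inl hA)⟩ hneg
        · have hv10 : v1.getD j 0 = v.getD j 0 := by
            rw [hv1, if_neg (by rintro ⟨_, hA'⟩; exact hA hA')]
          constructor
          · rintro ⟨_, hNF⟩
            rcases (hsplit j).mp hNF with h | hB
            · exact absurd h hA
            · exact (o2 j hj).1 ⟨by rw [hv10]; exact h0, hB⟩
          · intro hneg
            have hnB : ¬ pvNbrF n g t j := fun hB =>
              hneg ⟨h0, (hsplit j).mpr (Or.inr hB)⟩
            rw [(o2 j hj).2 (by rw [hv10]; rintro ⟨he, hB⟩; exact hnB hB), hv10]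
      · have hv10 : v1.getD j 0 = v.getD j 0 := by
          rw [hv1, if_neg (by rintro ⟨he, _⟩; exact h0 he)]
        constructor
        · rintro ⟨h0', _⟩
          exact absurd h0' h0
        · intro _
          rw [(o2 j hj).2 (by rw [hv10]; rintro ⟨he, _⟩; exact h0 he), hv10]
    · rw [o3 j, i3 j]
      by_cases hj : j < pvN n
      · have hv1 := i2 j hj
        rw [hsplit j]
        have hAr : (∃ i ∈ pvNbrs g x, pvCell n i = j) ↔
            (∃ i ∈ pvNbrs g x, pvInR n i ∧ pvCell n i = j) := by
          constructor
          · rintro ⟨i, him, hic⟩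
            exact ⟨i, him, hnbr_r i him, hic⟩
          · rintro ⟨i, him, _, hic⟩
            exact ⟨i, him, hic⟩
        by_cases h0 : v.getD j 0 = 0
        · by_cases hA : ∃ i ∈ pvNbrs g x, pvCell n i = j
          · have hv1m : v1.getD j 0 = m := by rw [hv1, if_pos ⟨h0, hA⟩]
            simp only [hv1m, hm, hAr.mp hA, hA, h0]
            tauto
          · have hv10 : v1.getD j 0 = v.getD j 0 := by
              rw [hv1, if_neg (by rintro ⟨_, hA'⟩; exact hA hA')]
            have : ¬ (∃ i ∈ pvNbrs g x, pvInR n i ∧ pvCell n i = j) := fun h => hA (hAr.mpr h)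
            simp only [hv10, h0, this, hA]
            tauto
        · have hv10 : v1.getD j 0 = v.getD j 0 := by
            rw [hv1, if_neg (by rintro ⟨he, _⟩; exact h0 he)]
          simp only [hv10, h0]
          tauto
      · constructor
        · rintro (h | ⟨h0, hB⟩)
          · rcases h with h | ⟨h0, hA⟩
            · exact Or.inl h
            · obtain ⟨i, him, hir, hic⟩ := hA
              exact absurd (hic ▸ pvCell_lt hn hir) hj
          · obtain ⟨y, hy, i, hi, hic⟩ := hB
            have := hgnb _ (pvCell_lt hn (hFr y (by simp [hy]))) i hi
            exact absurd (hic ▸ pvCell_lt hn this) hj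
        · rintro (h | ⟨h0, hNF⟩)
          · exact Or.inl (Or.inl h)
          · obtain ⟨y, hy, i, hi, hic⟩ := hNF
            have hyr := hFr y hy
            have := hgnb _ (pvCell_lt hn hyr) i hi
            exact absurd (hic ▸ pvCell_lt hn this) hj

-- ---- where the elements of an expansion's accumulator come from ----

theorem pv_inner_elems (m : Int) (nbrs : List Int) :
    ∀ (v acc : List Int), ∀ i' ∈ (nbrs.foldl (pvStepB m) (v, acc)).2, i' ∈ acc ∨ i' ∈ nbrs := by
  induction nbrs with
  | nil => intro v acc i' h; exact Or.inl h
  | cons i t ih =>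
    intro v acc i' h
    rw [List.foldl_cons] at h
    unfold pvStepB at h
    split_ifs at h with hc
    · rcases ih _ _ i' h with hacc | ht
      · rcases List.mem_append.mp hacc with h1 | h2
        · exact Or.inl h1
        · simp at h2
          subst h2
          exact Or.inr (by simp)
      · exact Or.inr (by simp [ht])
    · rcases ih _ _ i' h with hacc | ht
      · exact Or.inl hacc
      · exact Or.inr (by simp [ht])

theorem pv_outer_elems (g : List (List Int)) (m : Int) :
    ∀ (F v acc : List Int), ∀ i' ∈ (F.foldl (pvExpand g m) (v, acc)).2,
      i' ∈ acc ∨ ∃ x ∈ F, i' ∈ pvNbrs g x := by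
  intro F
  induction F with
  | nil => intro v acc i' h; exact Or.inl h
  | cons x t ih =>
    intro v acc i' h
    rw [List.foldl_cons] at h
    have hexp : pvExpand g m (v, acc) x = (pvNbrs g x).foldl (pvStepB m) (v, acc) := rfl
    rw [hexp] at h
    rcases hst : (pvNbrs g x).foldl (pvStepB m) (v, acc) with ⟨v1, acc1⟩
    rw [hst] at h
    rcases ih v1 acc1 i' h with hacc | ⟨y, hy, hnb⟩
    · have := pv_inner_elems m (pvNbrs g x) v acc i' (by rw [hst]; exact hacc)
      rcases this with h1 | h2
      · exact Or.inl h1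
      · exact Or.inr ⟨x, by simp, h2⟩
    · exact Or.inr ⟨y, by simp [hy], hnb⟩

-- ---- the two invariants of the level view ----

def pvAinv (n : Int) (roads : List (List Int)) (destination : Int) (d : Nat) (v : List Int) : Prop :=
  v.length = pvN n ∧ ∀ j, j < pvN n → j ≠ pvCell n destination →
    ((∀ e, pvMinD n roads destination e j → ¬(1 ≤ e ∧ e ≤ d)) → v.getD j 0 = 0) ∧
    (∀ e, pvMinD n roads destination e j → 1 ≤ e → e ≤ d → v.getD j 0 = (e : Int))

def pvFinv (n : Int) (roads : List (List Int)) (destination : Int) (d : Nat) (F : List Int) : Prop :=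
  (∀ i ∈ F, pvInR n i ∧
    (pvMinD n roads destination d (pvCell n i) ∨ pvCell n i = pvCell n destination)) ∧
  (∀ j, pvMinD n roads destination d j → j ≠ pvCell n destination → pvHasCell n F j) ∧
  (d = 0 → pvHasCell n F (pvCell n destination))

def pvAfinal (n : Int) (roads : List (List Int)) (destination : Int) (v' : List Int) : Prop :=
  v'.length = pvN n ∧ ∀ j, j < pvN n → j ≠ pvCell n destination →
    ((∃ e, 1 ≤ e ∧ pvMinD n roads destination e j ∧ v'.getD j 0 = (e : Int)) ∨
     ((∀ e, ¬ pvReach n roads destination e j) ∧ v'.getD j 0 = 0))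

theorem pv_minD_dest {n : Int} {roads : List (List Int)} {destination : Int} :
    pvMinD n roads destination 0 (pvCell n destination) :=
  ⟨rfl, by omega⟩

theorem pv_minD_dest_zero {n : Int} {roads : List (List Int)} {destination : Int} {d : Nat}
    (h : pvMinD n roads destination d (pvCell n destination)) : d = 0 :=
  pvMinD_unique h pv_minD_dest

-- the newly markable cells of one expansion are exactly the next sphere
theorem pv_key {n : Int} {roads : List (List Int)} {destination : Int}
    (hn : 0 ≤ n) (hgood : pvGood n roads) (hdest : pvInR n destination)
    {d : Nat} {v F : List Int}
    (hA : pvAinv n roads destination d v) (hF : pvFinv n roads destination d F) :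
    ∀ j, j < pvN n → j ≠ pvCell n destination →
      ((v.getD j 0 = 0 ∧ pvNbrF n (pvBuildGraph n roads) F j) ↔
        pvMinD n roads destination (d + 1) j) := by
  intro j hj hjd
  constructor
  · rintro ⟨h0, x, hxF, i, hi, hic⟩
    have hxr := (hF.1 x hxF).1
    have hcx := pvCell_lt hn hxr
    have hE : pvE n roads (pvCell n x) j := by
      have := pvNbrs_mem_E hn hgood hcx hi
      exact hic ▸ this.2
    rcases (hF.1 x hxF).2 with hmx | hxd
    · -- x is in the current sphere
      have hr : pvReach n roads destination (d + 1) j := ⟨pvCell n x, hmx.1, hE⟩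
      obtain ⟨e, he, hme⟩ := pvReach_minD (d + 1) j hr
      rcases Nat.eq_or_lt_of_le he with heq | hlt
      · exact heq ▸ hme
      · exfalso
        have he1 : 1 ≤ e := by
          rcases Nat.eq_zero_or_pos e with rfl | h1
          · exact absurd (pvMinD_zero_iff.mp hme) hjd
          · exact h1
        have := ((hA.2 j hj hjd).2 e hme he1 (by omega))
        rw [this] at h0
        omega
    · -- x is (an alias of) the destination cell
      have hE' : pvE n roads (pvCell n destination) j := hxd ▸ hE
      have hm1 : pvMinD n roads destination 1 j := pvE_dest hE' hjd
      rcases Nat.eq_zero_or_pos d with rfl | hd1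
      · exact hm1
      · exfalso
        have := ((hA.2 j hj hjd).2 1 hm1 (by omega) (by omega))
        rw [this] at h0
        omega
  · intro hm
    constructor
    · refine (hA.2 j hj hjd).1 (fun e hme ⟨h1, h2⟩ => ?_)
      have := pvMinD_unique hme hm
      omega
    · obtain ⟨x, hmx, hE⟩ := pvMinD_succ_pred hm
      have hxlt : x < pvN n := pvReach_lt hn hgood hdest d x hmx.1
      by_cases hxd : x = pvCell n destination
      · have hd0 : d = 0 := pv_minD_dest_zero (hxd ▸ hmx)
        obtain ⟨y, hyF, hyr, hyc⟩ := hF.2.2 hd0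
        obtain ⟨i, hig, hicell⟩ := pvE_nbr hn hgood hxlt hE
        exact ⟨y, hyF, i, by rw [hyc, ← hxd]; exact hig, hicell⟩
      · obtain ⟨y, hyF, hyr, hyc⟩ := hF.2.1 x hmx hxd
        obtain ⟨i, hig, hicell⟩ := pvE_nbr hn hgood hxlt hE
        exact ⟨y, hyF, i, by rw [hyc]; exact hig, hicell⟩

-- one expansion preserves both invariants, one level up
theorem pv_invstep {n : Int} {roads : List (List Int)} {destination : Int}
    (hn : 0 ≤ n) (hgood : pvGood n roads) (hdest : pvInR n destination)
    (d : Nat) (v F : List Int)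
    (hA : pvAinv n roads destination d v) (hF : pvFinv n roads destination d F) :
    pvAinv n roads destination (d + 1)
      (F.foldl (pvExpand (pvBuildGraph n roads) ((d : Int) + 1)) (v, [])).1 ∧
    pvFinv n roads destination (d + 1)
      (F.foldl (pvExpand (pvBuildGraph n roads) ((d : Int) + 1)) (v, [])).2 := by
  have hm : ((d : Int) + 1) ≠ 0 := by omega
  have hglen := pvBuildGraph_length n roads
  have hgnb : ∀ j, j < pvN n → ∀ i ∈ (pvBuildGraph n roads).getD j [], pvInR n i :=
    fun j hj i hi => (pvNbrs_mem_E hn hgood hj hi).1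
  have hFr : ∀ x ∈ F, pvInR n x := fun x hx => (hF.1 x hx).1
  obtain ⟨ol, o2, o3⟩ := pv_outer_mark (pvBuildGraph n roads) hn hm hglen hgnb F v [] hA.1 hFr
  have hkey := pv_key hn hgood hdest hA hF
  constructor
  · refine ⟨ol, fun j hj hjd => ⟨fun hno => ?_, fun e hme he1 he2 => ?_⟩⟩
    · have hnm : ¬ pvMinD n roads destination (d + 1) j := fun h => hno (d + 1) h ⟨by omega, le_refl _⟩
      have hnc : ¬ (v.getD j 0 = 0 ∧ pvNbrF n (pvBuildGraph n roads) F j) := fun h =>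
        hnm ((hkey j hj hjd).mp h)
      rw [(o2 j hj).2 hnc]
      exact (hA.2 j hj hjd).1 (fun e hme ⟨h1, h2⟩ => hno e hme ⟨h1, by omega⟩)
    · rcases Nat.lt_or_ge e (d + 1) with hlt | hge
      · have hv := (hA.2 j hj hjd).2 e hme he1 (by omega)
        have hnc : ¬ (v.getD j 0 = 0 ∧ pvNbrF n (pvBuildGraph n roads) F j) := by
          rintro ⟨h0, _⟩
          rw [hv] at h0
          omega
        rw [(o2 j hj).2 hnc]
        exact hv
      · have heq : e = d + 1 := by omega
        subst heq
        have hc := (hkey j hj hjd).mpr hme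
        rw [(o2 j hj).1 hc]
        push_cast
        ring
  · refine ⟨fun i hi => ?_, fun j hm' hjd => ?_, fun h => by omega⟩
    · have hir : pvInR n i := by
        rcases pv_outer_elems (pvBuildGraph n roads) _ F v [] i hi with h | ⟨x, hxF, hnb⟩
        · simp at h
        · have hxr := hFr x hxF
          have := hgnb _ (pvCell_lt hn hxr)
          unfold pvNbrs at hnb
          rw [pv_pyGetD_cellD (pvBuildGraph n roads) [] hn hxr hglen] at hnb
          exact this i hnb
      refine ⟨hir, ?_⟩
      have hhc : pvHasCell n (F.foldl (pvExpand (pvBuildGraph n roads) ((d : Int) + 1)) (v, [])).2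
          (pvCell n i) := ⟨i, hi, hir, rfl⟩
      rcases (o3 (pvCell n i)).mp hhc with h | ⟨h0, hNF⟩
      · exact absurd h (by simp [pvHasCell])
      · by_cases hid : pvCell n i = pvCell n destination
        · exact Or.inr hid
        · exact Or.inl ((hkey (pvCell n i) (pvCell_lt hn hir) hid).mp ⟨h0, hNF⟩)
    · have hc := (hkey j (pvReach_lt hn hgood hdest _ j hm'.1) hjd).mpr hm'
      exact ((o3 j).mpr (Or.inr hc))

-- once a sphere is empty, the array already carries the final answer
theorem pv_final_of_far {n : Int} {roads : List (List Int)} {destination : Int}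
    (hn : 0 ≤ n) (hgood : pvGood n roads) (hdest : pvInR n destination)
    {d : Nat} {v : List Int}
    (hA : pvAinv n roads destination d v)
    (hemp : ∀ j, ¬ pvMinD n roads destination d j) :
    pvAfinal n roads destination v := by
  refine ⟨hA.1, fun j hj hjd => ?_⟩
  by_cases hreach : ∃ e, pvReach n roads destination e j
  · obtain ⟨e, hre⟩ := hreach
    obtain ⟨e', he', hme⟩ := pvReach_minD e j hre
    have hlt : e' < d := by
      rcases Nat.lt_or_ge e' d with h | h
      · exact h
      · exact absurd hme (pvMinD_empty_succ hemp e' j h)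
    have he1 : 1 ≤ e' := by
      rcases Nat.eq_zero_or_pos e' with rfl | h1
      · exact absurd (pvMinD_zero_iff.mp hme) hjd
      · exact h1
    exact Or.inl ⟨e', he1, hme, (hA.2 j hj hjd).2 e' hme he1 (by omega)⟩
  · refine Or.inr ⟨fun e hre => hreach ⟨e, hre⟩, ?_⟩
    exact (hA.2 j hj hjd).1 (fun e hme _ => hreach ⟨e, hme.1⟩)

-- the level loop, run with enough fuel from a consistent state, yields the final answer
theorem pv_level_char {n : Int} {roads : List (List Int)} {destination : Int}
    (hn : 0 ≤ n) (hgood : pvGood n roads) (hdest : pvInR n destination) :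
    ∀ (c : Nat) (v : List Int), v.count 0 = c →
      ∀ (F : List Int) (d : Nat) (fuel : Nat), c + 1 ≤ fuel →
        pvAinv n roads destination d v → pvFinv n roads destination d F →
        (1 ≤ d ∨ F ≠ []) →
        pvAfinal n roads destination
          (pvLevel (pvBuildGraph n roads) fuel F (d : Int) v) := by
  intro c
  induction c using Nat.strong_induction_on with
  | _ c ih =>
    intro v hc F d fuel hfuel hA hF hdF
    match F with
    | [] =>
      have hd1 : 1 ≤ d := by
        rcases hdF with h | h
        · exact h
        · exact absurd rfl h
      have hemp : ∀ j, ¬ pvMinD n roads destination d j := by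
        intro j hm
        by_cases hjd : j = pvCell n destination
        · subst hjd
          have := pv_minD_dest_zero hm
          omega
        · rcases hF.2.1 j hm hjd with ⟨y, hy, _⟩
          simp at hy
      have : pvLevel (pvBuildGraph n roads) fuel [] (d : Int) v = v := by
        cases fuel <;> rfl
      rw [this]
      exact pv_final_of_far hn hgood hdest hA hemp
    | x :: rest =>
      obtain ⟨f, rfl⟩ : ∃ f, fuel = f + 1 := ⟨fuel - 1, by omega⟩
      rw [pvLevel]
      obtain ⟨hA', hF'⟩ := pv_invstep hn hgood hdest d v (x :: rest) hA hF
      have hcount := pv_countB_frontier (pvBuildGraph n roads) ((d : Int) + 1) (by omega) (x :: rest) v []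
      simp only [List.length_nil, Nat.add_zero] at hcount
      rcases hst : (x :: rest).foldl (pvExpand (pvBuildGraph n roads) ((d : Int) + 1)) (v, []) with ⟨v', nxt⟩
      rw [hst] at hA' hF' hcount
      have hcast : ((d : Int) + 1) = (((d + 1 : Nat)) : Int) := by push_cast; ring
      rw [hcast]
      match nxt with
      | [] =>
        have : pvLevel (pvBuildGraph n roads) f [] (((d + 1 : Nat)) : Int) v' = v' := by
          cases f <;> rfl
        rw [this]
        have hemp : ∀ j, ¬ pvMinD n roads destination (d + 1) j := by
          intro j hm
          by_cases hjd : j = pvCell n destination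
          · subst hjd
            have := pv_minD_dest_zero hm
            omega
          · rcases hF'.2.1 j hm hjd with ⟨y, hy, _⟩
            simp at hy
        exact pv_final_of_far hn hgood hdest hA' hemp
      | y :: ys =>
        have hlt : v'.count 0 < c := by
          simp at hcount
          omega
        exact ih (v'.count 0) hlt v' rfl (y :: ys) (d + 1) f (by simp at hcount ⊢; omega)
          hA' hF' (Or.inl (by omega))

-- ---- B-side: lower/upper bound invariants of the relaxation ----

def pvLB (n : Int) (roads : List (List Int)) (destination : Int)
    (dist : List (Option Int)) : Prop :=
  dist.length = pvN n ∧
  dist.getD (pvCell n destination) none = some 0 ∧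
  (∀ j, j < pvN n → ∀ w, dist.getD j none = some w →
     0 ≤ w ∧ ∃ e, pvMinD n roads destination e j ∧ (e : Int) ≤ w)

def pvUB (n : Int) (roads : List (List Int)) (destination : Int)
    (k : Nat) (dist : List (Option Int)) : Prop :=
  ∀ j e, pvMinD n roads destination e j → e ≤ k → dist.getD j none = some (e : Int)

theorem pv_fire_LB {n : Int} {roads : List (List Int)} {destination : Int}
    (hn : 0 ≤ n) {dist : List (Option Int)} {a b : Int} {db : Int}
    (ha : pvInR n a) (hb : pvInR n b)
    (hE : pvE n roads (pvCell n b) (pvCell n a))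
    (hLB : pvLB n roads destination dist)
    (hgb : dist.getD (pvCell n b) none = some db)
    (hcane : pvCell n a ≠ pvCell n destination) :
    pvLB n roads destination (dist.set (pvCell n a) (some (db + 1))) := by
  obtain ⟨hdb0, eb, hmeb, heble⟩ := hLB.2.2 (pvCell n b) (pvCell_lt hn hb) db hgb
  refine ⟨by simp [hLB.1], ?_, fun j hj w hw => ?_⟩
  · rw [pv_getD_set_ne dist _ _ _ _ (fun h => hcane h.symm)]
    exact hLB.2.1
  · by_cases hja : j = pvCell n a
    · subst hja
      rw [pv_getD_set_self dist _ _ _ (by rw [hLB.1]; exact pvCell_lt hn ha)] at hw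
      obtain rfl : w = db + 1 := by injection hw with h; exact h.symm
      refine ⟨by omega, ?_⟩
      have hr : pvReach n roads destination (eb + 1) (pvCell n a) := ⟨pvCell n b, hmeb.1, hE⟩
      obtain ⟨e, he, hme⟩ := pvReach_minD (eb + 1) _ hr
      exact ⟨e, hme, by push_cast; omega⟩
    · rw [pv_getD_set_ne dist _ _ _ _ hja] at hw
      exact hLB.2.2 j hj w hw

theorem pv_relaxAB_lem {n : Int} {roads : List (List Int)} {destination : Int}
    (hn : 0 ≤ n) (st : List (Option Int) × Bool) (a b : Int)
    (ha : pvInR n a) (hb : pvInR n b)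
    (hE : pvE n roads (pvCell n b) (pvCell n a))
    (hLB : pvLB n roads destination st.1) :
    pvLB n roads destination (pvRelaxAB st a b).1 ∧
    (∀ j e, pvMinD n roads destination e j → st.1.getD j none = some (e : Int) →
      (pvRelaxAB st a b).1.getD j none = some (e : Int)) := by
  have hlen := hLB.1
  have hbb := pv_pyGetD_cellD st.1 (none : Option Int) hn hb hlen
  have hba := pv_pyGetD_cellD st.1 (none : Option Int) hn ha hlen
  unfold pvRelaxAB
  rw [hbb, hba]
  cases hgb : st.1.getD (pvCell n b) none with
  | none => exact ⟨hLB, fun j e _ h => h⟩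
  | some db =>
    dsimp only
    obtain ⟨hdb0, eb, hmeb, heble⟩ := hLB.2.2 (pvCell n b) (pvCell_lt hn hb) db hgb
    have hsetb : PySem.List.pySetD st.1 a (some (db + 1)) =
        st.1.set (pvCell n a) (some (db + 1)) := pv_pySetD_cell st.1 _ hn ha hlen
    cases hga : st.1.getD (pvCell n a) none with
    | none =>
      dsimp only
      have hcane : pvCell n a ≠ pvCell n destination := by
        intro h
        rw [h, hLB.2.1] at hga
        cases hga
      simp only [hsetb]
      refine ⟨pv_fire_LB hn ha hb hE hLB hgb hcane, fun j e hme hw => ?_⟩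
      by_cases hja : j = pvCell n a
      · subst hja
        rw [hga] at hw
        cases hw
      · rw [pv_getD_set_ne st.1 _ _ _ _ hja]
        exact hw
    | some da =>
      dsimp only
      by_cases hfire : db + 1 < da
      · rw [if_pos hfire]
        have hcane : pvCell n a ≠ pvCell n destination := by
          intro h
          rw [h, hLB.2.1] at hga
          have : da = 0 := by injection hga with h'; exact h'.symm
          omega
        simp only [hsetb]
        refine ⟨pv_fire_LB hn ha hb hE hLB hgb hcane, fun j e hme hw => ?_⟩
        by_cases hja : j = pvCell n a
        · subst hja
          rw [hga] at hw
          have hda : da = (e : Int) := by injection hw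
          exfalso
          have hr : pvReach n roads destination (eb + 1) (pvCell n a) := ⟨pvCell n b, hmeb.1, hE⟩
          have hle := pvMinD_le_of_reach hme hr
          have : (e : Int) ≤ (eb : Int) + 1 := by push_cast; omega
          omega
        · rw [pv_getD_set_ne st.1 _ _ _ _ hja]
          exact hw
      · rw [if_neg hfire]
        exact ⟨hLB, fun j e _ h => h⟩

-- one relaxation direction, applied where it actually improves the target cell
theorem pv_AB_improve {n : Int} {roads : List (List Int)} {destination : Int}
    (hn : 0 ≤ n) (st : List (Option Int) × Bool) (a b : Int) {k : Nat}
    (ha : pvInR n a) (hb : pvInR n b)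
    (hE : pvE n roads (pvCell n b) (pvCell n a))
    (hLB : pvLB n roads destination st.1)
    (hgb : st.1.getD (pvCell n b) none = some (k : Int))
    (hmj : pvMinD n roads destination (k + 1) (pvCell n a)) :
    (pvRelaxAB st a b).1.getD (pvCell n a) none = some ((k : Int) + 1) := by
  have hlen := hLB.1
  have hbb := pv_pyGetD_cellD st.1 (none : Option Int) hn hb hlen
  have hba := pv_pyGetD_cellD st.1 (none : Option Int) hn ha hlen
  have hcaN : pvCell n a < pvN n := pvCell_lt hn ha
  unfold pvRelaxAB
  rw [hbb, hba, hgb]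
  cases hga : st.1.getD (pvCell n a) none with
  | none =>
    dsimp only
    rw [pv_pySetD_cell st.1 _ hn ha hlen]
    exact pv_getD_set_self st.1 _ _ _ (by rw [hlen]; exact hcaN)
  | some da =>
    dsimp only
    obtain ⟨hda0, e, hme, hele⟩ := hLB.2.2 (pvCell n a) hcaN da hga
    have heq : e = k + 1 := pvMinD_unique hme hmj
    subst heq
    by_cases hfire : (k : Int) + 1 < da
    · rw [if_pos hfire, pv_pySetD_cell st.1 _ hn ha hlen]
      exact pv_getD_set_self st.1 _ _ _ (by rw [hlen]; exact hcaN)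
    · rw [if_neg hfire]
      have : da = (k : Int) + 1 := by push_cast at hele; omega
      rw [hga, this]

theorem pv_relaxRoad_lem {n : Int} {roads : List (List Int)} {destination : Int}
    (hn : 0 ≤ n) (hgood : pvGood n roads)
    (st : List (Option Int) × Bool) (r : List Int) (hr : r ∈ roads)
    (hLB : pvLB n roads destination st.1) :
    pvLB n roads destination (pvRelaxRoad st r).1 ∧
    (∀ j e, pvMinD n roads destination e j → st.1.getD j none = some (e : Int) →
      (pvRelaxRoad st r).1.getD j none = some (e : Int)) := by
  obtain ⟨a, b, rfl⟩ := List.length_eq_two.mp (hgood r hr).1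
  have ha := (hgood _ hr).2 a (by simp)
  have hb := (hgood _ hr).2 b (by simp)
  have hEab : pvE n roads (pvCell n a) (pvCell n b) := ⟨a, b, hr, Or.inl ⟨rfl, rfl⟩⟩
  unfold pvRelaxRoad
  obtain ⟨h1LB, h1fr⟩ := pv_relaxAB_lem hn st a b ha hb (pvE_symm hEab) hLB
  obtain ⟨h2LB, h2fr⟩ := pv_relaxAB_lem hn (pvRelaxAB st a b) b a hb ha hEab h1LB
  exact ⟨h2LB, fun j e hme hw => h2fr j e hme (h1fr j e hme hw)⟩

theorem pv_road_hit {n : Int} {roads : List (List Int)} {destination : Int}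
    (hn : 0 ≤ n) (hgood : pvGood n roads)
    (st : List (Option Int) × Bool) {a b : Int} {x j k : Nat}
    (hr : [a, b] ∈ roads) (ha : pvInR n a) (hb : pvInR n b)
    (hor : (pvCell n a = x ∧ pvCell n b = j) ∨ (pvCell n a = j ∧ pvCell n b = x))
    (hmx : pvMinD n roads destination k x) (hmj : pvMinD n roads destination (k + 1) j)
    (hLB : pvLB n roads destination st.1)
    (hdx : st.1.getD x none = some (k : Int)) :
    (pvRelaxRoad st [a, b]).1.getD j none = some ((k : Int) + 1) := by
  have hEab : pvE n roads (pvCell n a) (pvCell n b) := ⟨a, b, hr, Or.inl ⟨rfl, rfl⟩⟩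
  unfold pvRelaxRoad
  rcases hor with ⟨hax, hbj⟩ | ⟨haj, hbx⟩
  · -- the edge is read as (x, j): the second direction b ← a fires
    obtain ⟨h1LB, h1fr⟩ := pv_relaxAB_lem hn st a b ha hb (pvE_symm hEab) hLB
    have h1x : (pvRelaxAB st a b).1.getD x none = some (k : Int) := h1fr x k hmx hdx
    have := pv_AB_improve hn (pvRelaxAB st a b) b a hb ha
      (by rw [hax, hbj] at hEab; exact hax ▸ hbj ▸ hEab) h1LB
      (by rw [hax]; exact h1x) (by rw [hbj]; exact hmj)
    rw [hbj] at this
    exact this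
  · -- the edge is read as (j, x): the first direction a ← b fires, then j is frozen
    have h1 := pv_AB_improve hn st a b ha hb (pvE_symm hEab) hLB
      (by rw [hbx]; exact hdx) (by rw [haj]; exact hmj)
    rw [haj] at h1
    obtain ⟨h1LB, _⟩ := pv_relaxAB_lem hn st a b ha hb (pvE_symm hEab) hLB
    obtain ⟨_, h2fr⟩ := pv_relaxAB_lem hn (pvRelaxAB st a b) b a hb ha hEab h1LB
    have hck : (((k + 1 : Nat)) : Int) = (k : Int) + 1 := by push_cast; ring
    have := h2fr j (k + 1) hmj (by rw [h1, hck])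
    rw [this, hck]

theorem pv_fold_LB {n : Int} {roads : List (List Int)} {destination : Int}
    (hn : 0 ≤ n) (hgood : pvGood n roads) :
    ∀ (rs : List (List Int)), (∀ r ∈ rs, r ∈ roads) →
      ∀ (st : List (Option Int) × Bool), pvLB n roads destination st.1 →
      pvLB n roads destination (rs.foldl pvRelaxRoad st).1 ∧
      (∀ j e, pvMinD n roads destination e j → st.1.getD j none = some (e : Int) →
        (rs.foldl pvRelaxRoad st).1.getD j none = some (e : Int)) := by
  intro rs
  induction rs with
  | nil => intro _ st hLB; exact ⟨hLB, fun j e _ h => h⟩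
  | cons r t ih =>
    intro hsub st hLB
    rw [List.foldl_cons]
    obtain ⟨h1LB, h1fr⟩ := pv_relaxRoad_lem hn hgood st r (hsub r (by simp)) hLB
    obtain ⟨h2LB, h2fr⟩ := ih (fun r' h => hsub r' (by simp [h])) (pvRelaxRoad st r) h1LB
    exact ⟨h2LB, fun j e hme hw => h2fr j e hme (h1fr j e hme hw)⟩

theorem pv_fold_hit {n : Int} {roads : List (List Int)} {destination : Int}
    (hn : 0 ≤ n) (hgood : pvGood n roads) :
    ∀ (rs : List (List Int)), (∀ r ∈ rs, r ∈ roads) →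
      ∀ (st : List (Option Int) × Bool) (a b : Int) (x j k : Nat),
      [a, b] ∈ rs → pvInR n a → pvInR n b →
      ((pvCell n a = x ∧ pvCell n b = j) ∨ (pvCell n a = j ∧ pvCell n b = x)) →
      pvMinD n roads destination k x → pvMinD n roads destination (k + 1) j →
      pvLB n roads destination st.1 →
      st.1.getD x none = some (k : Int) →
      (rs.foldl pvRelaxRoad st).1.getD j none = some ((k : Int) + 1) := by
  intro rs
  induction rs with
  | nil => intro _ st a b x j k hmem; simp at hmem
  | cons r t ih =>
    intro hsub st a b x j k hmem ha hb hor hmx hmj hLB hdx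
    rw [List.foldl_cons]
    rcases List.mem_cons.mp hmem with heq | hmem'
    · subst heq
      have hhit := pv_road_hit hn hgood st (hsub _ (by simp)) ha hb hor hmx hmj hLB hdx
      obtain ⟨h1LB, _⟩ := pv_relaxRoad_lem hn hgood st [a, b] (hsub _ (by simp)) hLB
      obtain ⟨_, h2fr⟩ := pv_fold_LB hn hgood t (fun r' h => hsub r' (by simp [h]))
        (pvRelaxRoad st [a, b]) h1LB
      have hck : (((k + 1 : Nat)) : Int) = (k : Int) + 1 := by push_cast; ring
      have := h2fr j (k + 1) hmj (by rw [hhit, hck])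
      rw [this, hck]
    · obtain ⟨h1LB, h1fr⟩ := pv_relaxRoad_lem hn hgood st r (hsub r (by simp)) hLB
      exact ih (fun r' h => hsub r' (by simp [h])) (pvRelaxRoad st r) a b x j k hmem' ha hb
        hor hmx hmj h1LB (h1fr x k hmx hdx)

-- ---- the early-stopped loop equals the pure n-round iteration ----

theorem pv_relaxAB_false (st : List (Option Int) × Bool) (a b : Int)
    (h : (pvRelaxAB st a b).2 = false) : pvRelaxAB st a b = st := by
  unfold pvRelaxAB at *
  cases h1 : PySem.List.pyGetD st.1 b none with
  | none => rfl
  | some db =>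
    rw [h1] at h
    cases h2 : PySem.List.pyGetD st.1 a none with
    | none => rw [h2] at h; simp at h
    | some da =>
      rw [h2] at h
      dsimp only at h ⊢
      split_ifs at h ⊢ <;> simp_all

theorem pv_relaxRoad_false (st : List (Option Int) × Bool) (r : List Int)
    (h : (pvRelaxRoad st r).2 = false) : pvRelaxRoad st r = st := by
  match r with
  | [] => rfl
  | [a] => rfl
  | [a, b] =>
    unfold pvRelaxRoad at *
    dsimp only at h ⊢
    have h1 : pvRelaxAB (pvRelaxAB st a b) b a = pvRelaxAB st a b := pv_relaxAB_false _ _ _ h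
    rw [h1] at h ⊢
    exact pv_relaxAB_false _ _ _ h
  | a :: b :: c :: t => rfl

theorem pv_fold_false : ∀ (rs : List (List Int)) (st : List (Option Int) × Bool),
    (rs.foldl pvRelaxRoad st).2 = false → rs.foldl pvRelaxRoad st = st := by
  intro rs
  induction rs with
  | nil => intro st h; rfl
  | cons r t ih =>
    intro st h
    rw [List.foldl_cons] at h ⊢
    have h1 := ih _ h
    rw [h1] at h ⊢
    exact pv_relaxRoad_false st r h

def pvPure (roads : List (List Int)) : Nat → List (Option Int) → List (Option Int)
  | 0, dist => dist
  | k + 1, dist => pvPure roads k (roads.foldl pvRelaxRoad (dist, false)).1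

theorem pv_pure_fix (roads : List (List Int)) (dist : List (Option Int))
    (h : (roads.foldl pvRelaxRoad (dist, false)).1 = dist) :
    ∀ k, pvPure roads k dist = dist := by
  intro k
  induction k with
  | zero => rfl
  | succ k ih => rw [pvPure, h]; exact ih

theorem pv_rounds_eq_pure (roads : List (List Int)) :
    ∀ (k : Nat) (dist : List (Option Int)), pvRounds roads k dist = pvPure roads k dist := by
  intro k
  induction k with
  | zero => intro dist; rfl
  | succ k ih =>
    intro dist
    rw [pvRounds, pvPure]
    cases hch : (roads.foldl pvRelaxRoad (dist, false)).2 with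
    | true => simp only [hch, if_true]; exact ih _
    | false =>
      simp only [hch, Bool.false_eq_true, if_false]
      have hfix := pv_fold_false roads (dist, false) hch
      have h1 : (roads.foldl pvRelaxRoad (dist, false)).1 = dist := by rw [hfix]
      rw [h1, pv_pure_fix roads dist h1 k]

-- one full pass extends correctness one level further out
theorem pv_round_UB {n : Int} {roads : List (List Int)} {destination : Int}
    (hn : 0 ≤ n) (hgood : pvGood n roads) (k : Nat) (dist : List (Option Int)) (ch : Bool)
    (hLB : pvLB n roads destination dist) (hUB : pvUB n roads destination k dist) :
    pvLB n roads destination (roads.foldl pvRelaxRoad (dist, ch)).1 ∧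
    pvUB n roads destination (k + 1) (roads.foldl pvRelaxRoad (dist, ch)).1 := by
  obtain ⟨hLB', hfr⟩ := pv_fold_LB hn hgood roads (fun r h => h) (dist, ch) hLB
  refine ⟨hLB', fun j e hme hle => ?_⟩
  rcases Nat.lt_or_ge e (k + 1) with hlt | hge
  · exact hfr j e hme (hUB j e hme (by omega))
  · obtain rfl : e = k + 1 := by omega
    obtain ⟨x, hmx, hE⟩ := pvMinD_succ_pred hme
    obtain ⟨a, b, hr, hor⟩ := hE
    have ha := (hgood _ hr).2 a (by simp)
    have hb := (hgood _ hr).2 b (by simp)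
    have hck : (((k + 1 : Nat)) : Int) = (k : Int) + 1 := by push_cast; ring
    rw [hck]
    exact pv_fold_hit hn hgood roads (fun r h => h) (dist, ch) a b x j k hr ha hb hor
      hmx hme hLB (hUB x k hmx (le_refl k))

theorem pv_pure_LBUB {n : Int} {roads : List (List Int)} {destination : Int}
    (hn : 0 ≤ n) (hgood : pvGood n roads) :
    ∀ (k : Nat) (k0 : Nat) (dist : List (Option Int)),
      pvLB n roads destination dist → pvUB n roads destination k0 dist →
      pvLB n roads destination (pvPure roads k dist) ∧
      pvUB n roads destination (k0 + k) (pvPure roads k dist) := by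
  intro k
  induction k with
  | zero => intro k0 dist hLB hUB; exact ⟨hLB, by simpa using hUB⟩
  | succ k ih =>
    intro k0 dist hLB hUB
    rw [pvPure]
    obtain ⟨hLB', hUB'⟩ := pv_round_UB hn hgood k0 dist false hLB hUB
    have := ih (k0 + 1) _ hLB' hUB'
    rwa [show k0 + 1 + k = k0 + (k + 1) by omega] at this

theorem pv_init_LBUB {n : Int} {roads : List (List Int)} {destination : Int}
    (hn : 0 ≤ n) (hdest : pvInR n destination) :
    pvLB n roads destination
      (PySem.List.pySetD (List.replicate ((n + 1).toNat) (none : Option Int)) destination (some 0)) ∧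
    pvUB n roads destination 0
      (PySem.List.pySetD (List.replicate ((n + 1).toNat) (none : Option Int)) destination (some 0)) := by
  have hlen : (List.replicate ((n + 1).toNat) (none : Option Int)).length = pvN n := by
    simp [pvN]
  rw [pv_pySetD_cell _ _ hn hdest hlen]
  have hcd : pvCell n destination < pvN n := pvCell_lt hn hdest
  have hself : ((List.replicate ((n + 1).toNat) (none : Option Int)).set
      (pvCell n destination) (some 0)).getD (pvCell n destination) none = some 0 :=
    pv_getD_set_self _ _ _ _ (by rw [hlen]; exact hcd)
  constructor
  · refine ⟨by simp [pvN], hself, fun j hj w hw => ?_⟩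
    by_cases hjd : j = pvCell n destination
    · subst hjd
      rw [hself] at hw
      obtain rfl : w = 0 := by injection hw with h'; exact h'.symm
      exact ⟨le_refl 0, 0, pv_minD_dest, by simp⟩
    · rw [pv_getD_set_ne _ _ _ _ _ hjd] at hw
      rw [List.getD_eq_getElem?_getD, List.getElem?_replicate] at hw
      split_ifs at hw <;> simp at hw
  · intro j e hme hle
    obtain rfl : e = 0 := by omega
    rw [pvMinD_zero_iff.mp hme]
    simpa using hself

-- the final array of B: exact distances on reachable cells, none elsewhere
theorem pv_B_final {n : Int} {roads : List (List Int)} {destination : Int}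
    (hn : 0 ≤ n) (hgood : pvGood n roads) (hdest : pvInR n destination) :
    pvLB n roads destination
      (pvRounds roads n.toNat
        (PySem.List.pySetD (List.replicate ((n + 1).toNat) (none : Option Int)) destination (some 0))) ∧
    pvUB n roads destination n.toNat
      (pvRounds roads n.toNat
        (PySem.List.pySetD (List.replicate ((n + 1).toNat) (none : Option Int)) destination (some 0))) := by
  rw [pv_rounds_eq_pure]
  obtain ⟨hLB0, hUB0⟩ := pv_init_LBUB (roads := roads) hn hdest
  have := pv_pure_LBUB hn hgood n.toNat 0 _ hLB0 hUB0
  simpa using this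

-- ---- entry-point forms of the two characterizations ----

theorem pv_A_final {n : Int} {roads : List (List Int)} {destination : Int}
    (hn : 0 ≤ n) (hgood : pvGood n roads) (hdest : pvInR n destination) :
    pvAfinal n roads destination
      (pvBfsA (pvBuildGraph n roads) ((n + 1).toNat + 1) [(destination, 0)]
        (List.replicate ((n + 1).toNat) 0)) := by
  have hcount : (List.replicate ((n + 1).toNat) (0 : Int)).count 0 = (n + 1).toNat := by simp
  have hmap : [((destination : Int), (0 : Int))] =
      [destination].map (fun x => (x, (0 : Int))) := rfl
  rw [hmap, pv_bfs_eq_level (pvBuildGraph n roads) ((n + 1).toNat) _ hcount [destination] 0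
    ((n + 1).toNat + 1) ((n + 1).toNat + 1) (by omega) (by simp) (by simp)]
  have hA0 : pvAinv n roads destination 0 (List.replicate ((n + 1).toNat) 0) := by
    refine ⟨by simp [pvN], fun j hj hjd => ⟨fun _ => ?_, fun e hme he1 he2 => by omega⟩⟩
    rw [List.getD_eq_getElem?_getD, List.getElem?_replicate]
    split_ifs <;> simp
  have hF0 : pvFinv n roads destination 0 [destination] := by
    refine ⟨fun i hi => ?_, fun j hm hjd => ?_, fun _ => ?_⟩
    · simp at hi
      subst hi
      exact ⟨hdest, Or.inr rfl⟩
    · exact absurd (pvMinD_zero_iff.mp hm) hjd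
    · exact ⟨destination, by simp, hdest, rfl⟩
  have := pv_level_char hn hgood hdest ((n + 1).toNat) _ hcount [destination] 0
    ((n + 1).toNat + 1) (by omega) hA0 hF0 (Or.inr (by simp))
  simpa using this

-- the two Pythons agree cell-wise on every non-aliased source
theorem pv_elem_eq {n : Int} {roads : List (List Int)} {destination : Int}
    (hn : 0 ≤ n) (hgood : pvGood n roads) (hdest : pvInR n destination)
    (s : Int) (hs : pvInR n s) (hne : s ≠ destination)
    (hcne : pvCell n s ≠ pvCell n destination) :
    (if s = destination then (0 : Int)
     else if PySem.List.pyGetD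
         (PySem.List.pySetD
           (pvBfsA (pvBuildGraph n roads) ((n + 1).toNat + 1) [(destination, 0)]
             (List.replicate ((n + 1).toNat) 0)) destination 0) s 0 = 0 then -1
     else PySem.List.pyGetD
         (PySem.List.pySetD
           (pvBfsA (pvBuildGraph n roads) ((n + 1).toNat + 1) [(destination, 0)]
             (List.replicate ((n + 1).toNat) 0)) destination 0) s 0) =
    (if s = destination then (0 : Int)
     else match PySem.List.pyGetD
         (pvRounds roads n.toNat
           (PySem.List.pySetD (List.replicate ((n + 1).toNat) (none : Option Int)) destination
             (some 0))) s none with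
         | none => -1
         | some w => w) := by
  rw [if_neg hne, if_neg hne]
  have hAfin := pv_A_final hn hgood hdest
  obtain ⟨hBLB, hBUB⟩ := pv_B_final hn hgood hdest
  set vis := pvBfsA (pvBuildGraph n roads) ((n + 1).toNat + 1) [(destination, 0)]
    (List.replicate ((n + 1).toNat) 0) with hvis
  set dist := pvRounds roads n.toNat
    (PySem.List.pySetD (List.replicate ((n + 1).toNat) (none : Option Int)) destination
      (some 0)) with hdist
  have hvlen : vis.length = pvN n := hAfin.1
  have hv2 : PySem.List.pySetD vis destination 0 = vis.set (pvCell n destination) 0 :=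
    pv_pySetD_cell vis _ hn hdest hvlen
  have hv2len : (vis.set (pvCell n destination) 0).length = pvN n := by simp [hvlen]
  have hgA : PySem.List.pyGetD (PySem.List.pySetD vis destination 0) s 0 =
      vis.getD (pvCell n s) 0 := by
    rw [hv2, pv_pyGetD_cellD _ _ hn hs hv2len, pv_getD_set_ne vis _ _ _ _ hcne]
  have hgB : PySem.List.pyGetD dist s none = dist.getD (pvCell n s) none :=
    pv_pyGetD_cellD dist none hn hs hBLB.1
  rw [hgA, hgB]
  have hslt : pvCell n s < pvN n := pvCell_lt hn hs
  rcases hAfin.2 (pvCell n s) hslt hcne with ⟨e, he1, hme, hval⟩ | ⟨hnr, hval⟩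
  · have hBv : dist.getD (pvCell n s) none = some (e : Int) := by
      refine hBUB (pvCell n s) e hme ?_
      have := pvMinD_lt_N hn hgood hdest hme
      unfold pvN at this
      omega
    rw [hval, hBv]
    have : ((e : Int)) ≠ 0 := by omega
    rw [if_neg this]
  · rw [hval, if_pos rfl]
    cases hg : dist.getD (pvCell n s) none with
    | none => rfl
    | some w =>
      exfalso
      obtain ⟨_, e, hme, _⟩ := hBLB.2.2 (pvCell n s) hslt w hg
      exact hnr e hme.1

-- ===== VERDICT (by name: the statement is the Claim_ definition above) =====
theorem solution_spec : Claim_unchanged_solution := by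
  intro n roads sources destination hDom hPre
  intro hnD
  obtain ⟨hn, hdest', hgood', hsrc'⟩ := hPre
  have hdest : pvInR n destination := hdest'
  have hgood : pvGood n roads := hgood'
  unfold solution solution_alt
  rw [PySem.List.foldl_append_singleton_eq_map
    (fun source => if source = destination then (0 : Int)
      else if PySem.List.pyGetD
          (PySem.List.pySetD
            (pvBfsA (pvBuildGraph n roads) ((n + 1).toNat + 1) [(destination, 0)]
              (List.replicate ((n + 1).toNat) 0)) destination 0) source 0 = 0 then -1
      else PySem.List.pyGetD
          (PySem.List.pySetD
            (pvBfsA (pvBuildGraph n roads) ((n + 1).toNat + 1) [(destination, 0)]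
              (List.replicate ((n + 1).toNat) 0)) destination 0) source 0) sources []]
  rw [List.nil_append]
  refine List.map_inj_left.mpr (fun s hs => ?_)
  by_cases hne : s = destination
  · rw [if_pos hne, if_pos hne]
  · have hsr : pvInR n s := hsrc' s hs
    by_cases hcne : pvCell n s = pvCell n destination
    · exfalso
      rcases pvCell_inj hn hsr hdest hcne with h | h | h
      · exact hne h
      · exact hnD ⟨s, hs, Or.inl h⟩
      · exact hnD ⟨s, hs, Or.inr h⟩
    · exact pv_elem_eq hn hgood hdest s hsr hne hcne

theorem solution_changed : Claim_changed_solution := by unfold Claim_changed_solution; decide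

theorem solution_tight : Claim_exact_solution := by
  intro n roads sources destination hDom hPre hD heq
  obtain ⟨hn, hdest', hgood', hsrc'⟩ := hPre
  have hdest : pvInR n destination := hdest'
  have hgood : pvGood n roads := hgood'
  obtain ⟨s, hs, hor⟩ := hD
  have hsr : pvInR n s := hsrc' s hs
  have hne : s ≠ destination := by rcases hor with h | h <;> omega
  have hcell : pvCell n s = pvCell n destination := pvCell_alias hn hsr hdest hor
  unfold solution solution_alt at heq
  rw [PySem.List.foldl_append_singleton_eq_map
    (fun source => if source = destination then (0 : Int)
      else if PySem.List.pyGetD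
          (PySem.List.pySetD
            (pvBfsA (pvBuildGraph n roads) ((n + 1).toNat + 1) [(destination, 0)]
              (List.replicate ((n + 1).toNat) 0)) destination 0) source 0 = 0 then -1
      else PySem.List.pyGetD
          (PySem.List.pySetD
            (pvBfsA (pvBuildGraph n roads) ((n + 1).toNat + 1) [(destination, 0)]
              (List.replicate ((n + 1).toNat) 0)) destination 0) source 0) sources []] at heq
  rw [List.nil_append] at heq
  have helem := List.map_inj_left.mp heq s hs
  rw [if_neg hne, if_neg hne] at helem
  have hAfin := pv_A_final hn hgood hdest
  obtain ⟨hBLB, _⟩ := pv_B_final hn hgood hdest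
  have hvlen : (pvBfsA (pvBuildGraph n roads) ((n + 1).toNat + 1) [(destination, 0)]
      (List.replicate ((n + 1).toNat) 0)).length = pvN n := hAfin.1
  have hv2 : PySem.List.pySetD (pvBfsA (pvBuildGraph n roads) ((n + 1).toNat + 1)
        [(destination, 0)] (List.replicate ((n + 1).toNat) 0)) destination 0 =
      (pvBfsA (pvBuildGraph n roads) ((n + 1).toNat + 1) [(destination, 0)]
        (List.replicate ((n + 1).toNat) 0)).set (pvCell n destination) 0 :=
    pv_pySetD_cell _ _ hn hdest hvlen
  have hgA : PySem.List.pyGetD (PySem.List.pySetD (pvBfsA (pvBuildGraph n roads)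
        ((n + 1).toNat + 1) [(destination, 0)] (List.replicate ((n + 1).toNat) 0))
        destination 0) s 0 = 0 := by
    rw [hv2, pv_pyGetD_cellD _ _ hn hsr (by simp [hvlen]), hcell]
    exact pv_getD_set_self _ _ _ _ (by rw [hvlen]; exact pvCell_lt hn hdest)
  rw [hgA, if_pos rfl] at helem
  have hgB : PySem.List.pyGetD (pvRounds roads n.toNat
      (PySem.List.pySetD (List.replicate ((n + 1).toNat) (none : Option Int)) destination
        (some 0))) s none = some 0 := by
    rw [pv_pyGetD_cellD _ _ hn hsr hBLB.1, hcell]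
    exact hBLB.2.1
  rw [hgB] at helem
  exact absurd helem (by decide)
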